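-- pv_equiv track=rewrite | github.com/eunna-lim/algorithm_study | eunna/level2/154540.py | solution
-- ===== SOURCE A (Python) =====
-- from collections import deque
--
-- def solution(maps):
--     answer = []
--     visited = [[False for y in range(len(maps[0]))] for x in range(len(maps))]
--     moves = [[0, 1], [0, -1], [1, 0], [-1, 0]]
--
--     for x in range(len(maps)):
--         for y in range(len(maps[0])):
--             if maps[x][y] == "X" or visited[x][y]:
--                 continue
--
--             queue = deque([[x, y]])
--             visited[x][y] = True
--             food = int(maps[x][y])
--             while queue:
--                 curX, curY = queue.popleft()
--
--                 if not isAvailable(curX, curY, len(maps), len(maps[0])):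
--                     continue
--
--                 for mx, my in moves:
--                     nX = curX + mx
--                     nY = curY + my
--                     if (
--                         isAvailable(nX, nY, len(maps), len(maps[0]))
--                         and not visited[nX][nY]
--                         and maps[nX][nY] != "X"
--                     ):
--                         queue.append([nX, nY])
--                         visited[nX][nY] = True
--                         food += int(maps[nX][nY])
--
--             answer.append(food)
--
--     if len(answer) == 0:
--         return [-1]
--
--     return sorted(answer)
--
-- def isAvailable(x, y, lenX, lenY):
--     return x < lenX and x >= 0 and y < lenY and y >= 0
-- ===== SOURCE B (Python) =====
-- def solution(maps):
--     h, w = len(maps), (len(maps[0]) if maps else 0)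
--     parent = {}
--     for x in range(h):
--         for y in range(w):
--             if maps[x][y] != 'X':
--                 parent[(x, y)] = (x, y)
--     for x in range(h):
--         for y in range(w):
--             if maps[x][y] != 'X':
--                 for nx, ny in ((x + 1, y), (x, y + 1)):
--                     if nx < h and ny < w and maps[nx][ny] != 'X':
--                         ra, rb = find(parent, (x, y)), find(parent, (nx, ny))
--                         if ra != rb:
--                             parent[ra] = rb
--     sums = {}
--     for x in range(h):
--         for y in range(w):
--             if maps[x][y] != 'X':
--                 r = find(parent, (x, y))
--                 sums[r] = sums.get(r, 0) + int(maps[x][y])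
--     if not sums:
--         return [-1]
--     return sorted(sums.values())
--
-- def find(parent, i):
--     while parent[i] != i:
--         i = parent[i]
--     return i
-- ===== Notes on version B (the rewrite author's own statement) =====
-- stated objective: alternative
-- what changed: Replaces the per-component BFS flood fill (deque worklist + boolean visited matrix, summing food while enqueueing) by a disjoint-set union-find: every non-'X' cell becomes its own parent, each right/down adjacent pair is unioned, and a final pass groups cell values into per-root sums in a dict, sorted at the end.
-- outside the precondition, e.g. on solution(['12', 'X']): A raises IndexError, B raises IndexError; on solution(['1a']): A raises ValueError, B raises ValueError
import Mathlib
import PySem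

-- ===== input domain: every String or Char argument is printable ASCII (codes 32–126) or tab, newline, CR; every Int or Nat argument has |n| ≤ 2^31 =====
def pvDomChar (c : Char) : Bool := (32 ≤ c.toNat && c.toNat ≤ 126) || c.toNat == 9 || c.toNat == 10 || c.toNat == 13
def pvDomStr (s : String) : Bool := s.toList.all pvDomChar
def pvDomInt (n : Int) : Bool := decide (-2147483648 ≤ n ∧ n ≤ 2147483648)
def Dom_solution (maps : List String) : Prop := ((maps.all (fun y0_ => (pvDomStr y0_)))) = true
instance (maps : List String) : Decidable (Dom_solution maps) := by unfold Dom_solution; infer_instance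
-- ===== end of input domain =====

-- B replaces A's breadth-first flood fill (deque + boolean visited matrix, food summed at
-- enqueue time) by a disjoint-set union-find: each non-'X' cell starts as its own parent,
-- right/down adjacent pairs are unioned, and a final pass groups cell values per root.


-- Shared accessors (both Pythons read `len(maps)`, `len(maps[0])`, `maps[x][y]` and
-- `int(maps[x][y])`; indices are guarded in-range by both programs on admitted inputs,
-- so the getD defaults are never used there).
def gH (maps : List String) : Nat := maps.length
def gW (maps : List String) : Nat := (maps.headD "").toList.length
def cellChar (maps : List String) (x y : Int) : Char :=
  ((maps.getD x.toNat "").toList.getD y.toNat '?')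
def cellVal (maps : List String) (x y : Int) : Int :=
  (PySem.Int.ofStr? (String.ofList [cellChar maps x y])).getD 0

-- ===== PORT A =====
def isAvailable (x y lenX lenY : Int) : Bool :=
  decide (x < lenX) && decide (x ≥ 0) && decide (y < lenY) && decide (y ≥ 0)

def vGet (v : List (List Bool)) (x y : Int) : Bool := (v.getD x.toNat []).getD y.toNat false

def vSet (v : List (List Bool)) (x y : Int) : List (List Bool) :=
  v.set x.toNat ((v.getD x.toNat []).set y.toNat true)

def movesA : List (Int × Int) := [(0, 1), (0, -1), (1, 0), (-1, 0)]

def bfsStep (maps : List String) (h w cx cy : Int)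
    (st : List (Int × Int) × List (List Bool) × Int) (m : Int × Int) :
    List (Int × Int) × List (List Bool) × Int :=
  let nX := cx + m.1
  let nY := cy + m.2
  if isAvailable nX nY h w && !vGet st.2.1 nX nY && !(cellChar maps nX nY == 'X') then
    (st.1 ++ [(nX, nY)], vSet st.2.1 nX nY, st.2.2 + cellVal maps nX nY)
  else st

def bfsLoop (maps : List String) (h w : Int) :
    Nat → List (Int × Int) → List (List Bool) → Int → List (List Bool) × Int
  | 0, _, v, f => (v, f)          -- fuel guard only; never reached from solution
  | _ + 1, [], v, f => (v, f)
  | fuel + 1, c :: rest, v, f =>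
    if !isAvailable c.1 c.2 h w then bfsLoop maps h w fuel rest v f
    else
      let s := movesA.foldl (bfsStep maps h w c.1 c.2) (rest, v, f)
      bfsLoop maps h w fuel s.1 s.2.1 s.2.2

def scanA (maps : List String) (x : Nat) (st : List (List Bool) × List Int) (y : Nat) :
    List (List Bool) × List Int :=
  if cellChar maps x y == 'X' || vGet st.1 x y then st
  else
    let v1 := vSet st.1 (x : Int) (y : Int)
    let food := cellVal maps x y
    let r := bfsLoop maps (gH maps) (gW maps) (gH maps * gW maps + 1) [((x : Int), (y : Int))] v1 food
    (r.1, st.2 ++ [r.2])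

def solution (maps : List String) : List Int :=
  let init : List (List Bool) := (List.range (gH maps)).map fun _ => (List.range (gW maps)).map fun _ => false
  let final : List (List Bool) × List Int :=
    (List.range (gH maps)).foldl (fun st x => (List.range (gW maps)).foldl (scanA maps x) st) (init, [])
  if final.2.length = 0 then [-1]
  else PySem.List.sorted final.2 (fun x => x) false

-- ===== PORT B =====
-- `while parent[i] != i: i = parent[i]` with fuel (never reached from solution_alt);
-- the getD default i makes a missing key a fixpoint (parent keys are never missing here).
def findUF (p : PySem.Dict (Int × Int) (Int × Int)) :
    Nat → (Int × Int) → (Int × Int)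
  | 0, i => i                     -- fuel guard only
  | fuel + 1, i => if p.getD i i = i then i else findUF p fuel (p.getD i i)

def ufFuel (maps : List String) : Nat := gH maps * gW maps + 1

def initStep (maps : List String) (p : PySem.Dict (Int × Int) (Int × Int)) (c : Int × Int) :
    PySem.Dict (Int × Int) (Int × Int) :=
  if cellChar maps c.1 c.2 == 'X' then p else p.insert c c

def unionStep (maps : List String) (p : PySem.Dict (Int × Int) (Int × Int)) (a b : Int × Int) :
    PySem.Dict (Int × Int) (Int × Int) :=
  let ra := findUF p (ufFuel maps) a
  let rb := findUF p (ufFuel maps) b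
  if ra = rb then p else p.insert ra rb

def edgeStep (maps : List String) (p : PySem.Dict (Int × Int) (Int × Int)) (c : Int × Int) :
    PySem.Dict (Int × Int) (Int × Int) :=
  if cellChar maps c.1 c.2 == 'X' then p
  else
    [(c.1 + 1, c.2), (c.1, c.2 + 1)].foldl (fun p n =>
      if decide (n.1 < (gH maps : Int)) && decide (n.2 < (gW maps : Int))
          && !(cellChar maps n.1 n.2 == 'X') then unionStep maps p c n else p) p

def sumStep (maps : List String) (pf : PySem.Dict (Int × Int) (Int × Int))
    (d : PySem.Dict (Int × Int) Int) (c : Int × Int) : PySem.Dict (Int × Int) Int :=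
  if cellChar maps c.1 c.2 == 'X' then d
  else
    let r := findUF pf (ufFuel maps) c
    d.insert r (d.getD r 0 + cellVal maps c.1 c.2)

def solution_alt (maps : List String) : List Int :=
  let p0 : PySem.Dict (Int × Int) (Int × Int) :=
    (List.range (gH maps)).foldl (fun p (x : Nat) =>
      (List.range (gW maps)).foldl (fun p (y : Nat) => initStep maps p ((x : Int), (y : Int))) p)
      PySem.Dict.empty
  let pf : PySem.Dict (Int × Int) (Int × Int) :=
    (List.range (gH maps)).foldl (fun p (x : Nat) =>
      (List.range (gW maps)).foldl (fun p (y : Nat) => edgeStep maps p ((x : Int), (y : Int))) p) p0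
  let sums : PySem.Dict (Int × Int) Int :=
    (List.range (gH maps)).foldl (fun d (x : Nat) =>
      (List.range (gW maps)).foldl (fun d (y : Nat) => sumStep maps pf d ((x : Int), (y : Int))) d)
      PySem.Dict.empty
  if sums.items.isEmpty then [-1]
  else PySem.List.sorted sums.values (fun x => x) false

-- ===== PRECONDITION & SPEC =====
-- Pre_ excludes exactly the inputs on which A raises: a row shorter than the first row
-- (IndexError) or a scanned cell that is neither 'X' nor a decimal digit (ValueError).
def Pre_solution (maps : List String) : Prop :=
  (maps.all (fun row =>
     decide ((maps.headD "").toList.length ≤ row.toList.length) &&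
     (row.toList.take (maps.headD "").toList.length).all (fun c => c == 'X' || c.isDigit))) = true

instance (maps : List String) : Decidable (Pre_solution maps) := by
  unfold Pre_solution; infer_instance

def pvWitness_solution : List String := ["1X", "51"]

def Spec_solution (maps : List String) (out : List Int) : Prop := out = solution_alt maps
instance (maps : List String) (out : List Int) : Decidable (Spec_solution maps out) := by
  unfold Spec_solution; infer_instance

-- ===== CLAIM (what is proved, stated in full; the proofs are below) =====
def Claim_equal_solution : Prop :=
  ∀ (maps : List String), Dom_solution maps → Pre_solution maps → Spec_solution maps (solution maps)

-- ===== LEMMAS AND PROOFS =====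

-- The proof characterises BOTH programs against one canonical description: scanning the
-- grid in row-major order, the cells that start a new connected component ("seeds", in
-- order) and, for each, the sum of its component's values.  A's flood fill produces that
-- list directly (bfsLoop_spec, foldA_inv); B's union-find is shown to compute a root
-- function constant exactly on components (UFI/union_spec/R_eq_iff), so its grouping
-- dict lists the same sums keyed by roots in the same seed order (sum_fold).

def okCell (maps : List String) (c : Int × Int) : Prop :=
  0 ≤ c.1 ∧ c.1 < (gH maps : Int) ∧ 0 ≤ c.2 ∧ c.2 < (gW maps : Int) ∧ cellChar maps c.1 c.2 ≠ 'X'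

def adjC (c n : Int × Int) : Prop :=
  n = (c.1 + 1, c.2) ∨ n = (c.1 - 1, c.2) ∨ n = (c.1, c.2 + 1) ∨ n = (c.1, c.2 - 1)

-- cells reachable from s via adjacent ok cells that were not visited before the region
inductive ReachP (maps : List String) (V0 : Int × Int → Bool) (s : Int × Int) : Int × Int → Prop
  | base : ReachP maps V0 s s
  | step {c n : Int × Int} : ReachP maps V0 s c → adjC c n → okCell maps n → V0 n = false →
      ReachP maps V0 s n

def gridFin (maps : List String) : Finset (Int × Int) :=
  ((Finset.range (gH maps)) ×ˢ (Finset.range (gW maps))).image (fun p => ((p.1 : Int), (p.2 : Int)))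

def visFin (maps : List String) (p : Int × Int → Bool) : Finset (Int × Int) :=
  (gridFin maps).filter (fun c => p c = true)

def sumVal (maps : List String) (F : Finset (Int × Int)) : Int :=
  F.sum (fun c => cellVal maps c.1 c.2)

def Shape (maps : List String) (v : List (List Bool)) : Prop :=
  v.length = gH maps ∧ ∀ r ∈ v, r.length = gW maps

theorem mem_gridFin (maps : List String) (c : Int × Int) :
    c ∈ gridFin maps ↔ 0 ≤ c.1 ∧ c.1 < (gH maps : Int) ∧ 0 ≤ c.2 ∧ c.2 < (gW maps : Int) := by
  simp only [gridFin, Finset.mem_image, Finset.mem_product, Finset.mem_range]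
  constructor
  · rintro ⟨p, ⟨h1, h2⟩, rfl⟩
    refine ⟨by positivity, by simpa using h1, by positivity, by simpa using h2⟩
  · rintro ⟨h1, h2, h3, h4⟩
    refine ⟨(c.1.toNat, c.2.toNat), ⟨by omega, by omega⟩, ?_⟩
    simp [Int.toNat_of_nonneg h1, Int.toNat_of_nonneg h3]

theorem card_gridFin (maps : List String) : (gridFin maps).card = gH maps * gW maps := by
  rw [gridFin, Finset.card_image_of_injective, Finset.card_product, Finset.card_range, Finset.card_range]
  intro a b h
  simp only [Prod.mk.injEq] at h
  exact Prod.ext (by exact_mod_cast h.1) (by exact_mod_cast h.2)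

theorem ok_mem_gridFin (maps : List String) (c : Int × Int) (h : okCell maps c) :
    c ∈ gridFin maps := by
  rw [mem_gridFin]; obtain ⟨a, b, d, e, _⟩ := h; exact ⟨a, b, d, e⟩

theorem visFin_card_le (maps : List String) (p : Int × Int → Bool) :
    (visFin maps p).card ≤ gH maps * gW maps := by
  rw [← card_gridFin]; exact Finset.card_le_card (Finset.filter_subset _ _)

theorem mem_visFin (maps : List String) (p : Int × Int → Bool) (c : Int × Int) :
    c ∈ visFin maps p ↔ c ∈ gridFin maps ∧ p c = true := by
  simp [visFin]

theorem visFin_insert_of_mark (maps : List String) (p p' : Int × Int → Bool) (n : Int × Int)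
    (hn : n ∈ gridFin maps) (hnp : p n = false)
    (h : ∀ c ∈ gridFin maps, p' c = if c = n then true else p c) :
    visFin maps p' = insert n (visFin maps p) ∧ n ∉ visFin maps p := by
  constructor
  · apply Finset.ext
    intro c
    rw [Finset.mem_insert, mem_visFin, mem_visFin]
    constructor
    · rintro ⟨hc, hpc⟩
      rw [h c hc] at hpc
      by_cases hcn : c = n
      · exact Or.inl hcn
      · simp [hcn] at hpc; exact Or.inr ⟨hc, hpc⟩
    · rintro (rfl | ⟨hc, hpc⟩)
      · exact ⟨hn, by rw [h c hn]; simp⟩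
      · refine ⟨hc, ?_⟩
        rw [h c hc]
        by_cases hcn : c = n
        · simp [hcn]
        · simp [hcn, hpc]
  · rw [mem_visFin]; rintro ⟨_, hc⟩; rw [hnp] at hc; exact absurd hc (by simp)

theorem sum_after_mark (maps : List String) (F B : Finset (Int × Int)) (n : Int × Int)
    (hnF : n ∉ F) (hnB : n ∉ B) :
    sumVal maps (insert n F \ B) = sumVal maps (F \ B) + cellVal maps n.1 n.2 := by
  have h1 : insert n F \ B = insert n (F \ B) := by
    apply Finset.ext; intro c
    simp only [Finset.mem_sdiff, Finset.mem_insert]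
    constructor
    · rintro ⟨rfl | hc, hb⟩
      · exact Or.inl rfl
      · exact Or.inr ⟨hc, hb⟩
    · rintro (rfl | ⟨hc, hb⟩)
      · exact ⟨Or.inl rfl, hnB⟩
      · exact ⟨Or.inr hc, hb⟩
  rw [h1, sumVal, Finset.sum_insert (by simp [hnF]), sumVal]; ring

structure StInv (maps : List String) (V0 : Int × Int → Bool) (s : Int × Int)
    (p : Int × Int → Bool) : Prop where
  mono  : ∀ c ∈ gridFin maps, V0 c = true → p c = true
  svis  : p s = true
  sok   : okCell maps s
  snew  : V0 s = false
  sound : ∀ c ∈ gridFin maps, p c = true →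
            V0 c = true ∨ (okCell maps c ∧ V0 c = false ∧ ReachP maps V0 s c)
def WInv (maps : List String) (V0 : Int × Int → Bool) (p : Int × Int → Bool)
    (q : List (Int × Int)) : Prop :=
  ∀ c ∈ q, p c = true ∧ V0 c = false ∧ okCell maps c
def ClosedExcept (maps : List String) (V0 : Int × Int → Bool) (p : Int × Int → Bool)
    (q : List (Int × Int)) : Prop :=
  ∀ c ∈ gridFin maps, p c = true → V0 c = false → c ∉ q →
    ∀ n, adjC c n → okCell maps n → p n = true

theorem isAvailable_iff (maps : List String) (x y : Int) :
    isAvailable x y (gH maps) (gW maps) = true ↔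
      0 ≤ x ∧ x < (gH maps : Int) ∧ 0 ≤ y ∧ y < (gW maps : Int) := by
  simp [isAvailable]; tauto

theorem shape_vSet (maps : List String) (v : List (List Bool)) (hsh : Shape maps v) (x y : Int) :
    Shape maps (vSet v x y) := by
  obtain ⟨hl, hr⟩ := hsh
  by_cases hx : x.toNat < v.length
  · constructor
    · simp [vSet, hl]
    · intro r hrm
      rcases List.mem_or_eq_of_mem_set hrm with h | h
      · exact hr r h
      · subst h
        rw [List.length_set]
        have : v.getD x.toNat [] = v[x.toNat] := by
          simp [List.getD_eq_getElem?_getD, List.getElem?_eq_getElem hx]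
        rw [this]
        exact hr _ (List.getElem_mem hx)
  · rw [vSet, List.set_eq_of_length_le (by omega)]
    exact ⟨hl, hr⟩
theorem vGet_vSet (maps : List String) (v : List (List Bool)) (hsh : Shape maps v)
    (x y : Int) (hx : 0 ≤ x) (hxh : x < (gH maps : Int)) (hy : 0 ≤ y) (hyw : y < (gW maps : Int))
    (a b : Int) (ha : 0 ≤ a) (hb : 0 ≤ b) :
    vGet (vSet v x y) a b = if a = x ∧ b = y then true else vGet v a b := by
  obtain ⟨hl, hr⟩ := hsh
  have hxl : x.toNat < v.length := by omega
  have hrow : v.getD x.toNat [] = v[x.toNat] := by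
    simp [List.getD_eq_getElem?_getD, List.getElem?_eq_getElem hxl]
  have hrl : (v[x.toNat]).length = gW maps := hr _ (List.getElem_mem hxl)
  have hyl : y.toNat < (v[x.toNat]).length := by omega
  by_cases hax : a.toNat = x.toNat
  · have hax' : a = x := by omega
    have houter : (vSet v x y).getD a.toNat [] = (v.getD x.toNat []).set y.toNat true := by
      rw [vSet, List.getD_eq_getElem?_getD, hax, List.getElem?_set_self hxl]; rfl
    rw [vGet, houter]
    by_cases hby : b.toNat = y.toNat
    · have hby' : b = y := by omega
      rw [hrow, List.getD_eq_getElem?_getD, hby, List.getElem?_set_self hyl]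
      simp [hax', hby']
    · have hby' : ¬ b = y := by omega
      have hinner : ((v.getD x.toNat []).set y.toNat true).getD b.toNat false
          = (v.getD x.toNat []).getD b.toNat false := by
        rw [List.getD_eq_getElem?_getD, List.getElem?_set_ne (by omega), ← List.getD_eq_getElem?_getD]
      rw [hinner]
      simp [hax', hby', vGet]
  · have hax' : ¬ a = x := by omega
    have houter : (vSet v x y).getD a.toNat [] = v.getD a.toNat [] := by
      rw [vSet, List.getD_eq_getElem?_getD, List.getElem?_set_ne (by omega), ← List.getD_eq_getElem?_getD]
    rw [vGet, houter]
    simp [hax', vGet]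

theorem final_char (maps : List String) (V0 : Int × Int → Bool) (s : Int × Int)
    (p : Int × Int → Bool) (hst : StInv maps V0 s p)
    (hcl : ClosedExcept maps V0 p []) :
    ∀ c ∈ gridFin maps, (p c = true ↔ V0 c = true ∨ ReachP maps V0 s c) := by
  have key : ∀ c, ReachP maps V0 s c → okCell maps c ∧ V0 c = false ∧ p c = true := by
    intro c hr
    induction hr with
    | base => exact ⟨hst.sok, hst.snew, hst.svis⟩
    | step hr hadj hok hv ih =>
      refine ⟨hok, hv, ?_⟩
      exact hcl _ (ok_mem_gridFin maps _ ih.1) ih.2.2 ih.2.1 (by simp) _ hadj hok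
  intro c hc
  constructor
  · intro hp
    rcases hst.sound c hc hp with h | ⟨_, _, h⟩
    · exact Or.inl h
    · exact Or.inr h
  · rintro (h | h)
    · exact hst.mono c hc h
    · exact (key c h).2.2
theorem okCell_iff_guard (maps : List String) (n : Int × Int) :
    okCell maps n ↔ (isAvailable n.1 n.2 (gH maps) (gW maps) = true ∧ (cellChar maps n.1 n.2 == 'X') = false) := by
  rw [okCell, isAvailable_iff]
  constructor
  · rintro ⟨a, b, c, d, e⟩
    exact ⟨⟨a, b, c, d⟩, by simpa using e⟩
  · rintro ⟨⟨a, b, c, d⟩, e⟩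
    exact ⟨a, b, c, d, by simpa using e⟩

theorem foldA_spec (maps : List String) (V0 : Int × Int → Bool) (s cur : Int × Int)
    (hcurok : okCell maps cur) (hcurre : ReachP maps V0 s cur) :
    ∀ (ms : List (Int × Int)) (hms : ∀ m ∈ ms, adjC cur (cur.1 + m.1, cur.2 + m.2))
      (q : List (Int × Int)) (v : List (List Bool)) (f f0 : Int)
      (hsh : Shape maps v) (hst : StInv maps V0 s (fun c => vGet v c.1 c.2))
      (hfood : f = f0 + sumVal maps (visFin maps (fun c => vGet v c.1 c.2) \ visFin maps V0)),
    ∃ ext : List (Int × Int),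
      (ms.foldl (bfsStep maps (gH maps) (gW maps) cur.1 cur.2) (q, v, f)).1 = q ++ ext ∧
      Shape maps (ms.foldl (bfsStep maps (gH maps) (gW maps) cur.1 cur.2) (q, v, f)).2.1 ∧
      StInv maps V0 s (fun c => vGet (ms.foldl (bfsStep maps (gH maps) (gW maps) cur.1 cur.2) (q, v, f)).2.1 c.1 c.2) ∧
      (∀ c ∈ gridFin maps, vGet v c.1 c.2 = true → vGet (ms.foldl (bfsStep maps (gH maps) (gW maps) cur.1 cur.2) (q, v, f)).2.1 c.1 c.2 = true) ∧
      WInv maps V0 (fun c => vGet (ms.foldl (bfsStep maps (gH maps) (gW maps) cur.1 cur.2) (q, v, f)).2.1 c.1 c.2) ext ∧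
      (∀ c ∈ gridFin maps, vGet (ms.foldl (bfsStep maps (gH maps) (gW maps) cur.1 cur.2) (q, v, f)).2.1 c.1 c.2 = true → vGet v c.1 c.2 = true ∨ c ∈ ext) ∧
      (∀ m ∈ ms, okCell maps (cur.1 + m.1, cur.2 + m.2) →
        vGet (ms.foldl (bfsStep maps (gH maps) (gW maps) cur.1 cur.2) (q, v, f)).2.1 (cur.1 + m.1) (cur.2 + m.2) = true) ∧
      (visFin maps (fun c => vGet (ms.foldl (bfsStep maps (gH maps) (gW maps) cur.1 cur.2) (q, v, f)).2.1 c.1 c.2)).card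
        = (visFin maps (fun c => vGet v c.1 c.2)).card + ext.length ∧
      (ms.foldl (bfsStep maps (gH maps) (gW maps) cur.1 cur.2) (q, v, f)).2.2
        = f0 + sumVal maps (visFin maps (fun c => vGet (ms.foldl (bfsStep maps (gH maps) (gW maps) cur.1 cur.2) (q, v, f)).2.1 c.1 c.2) \ visFin maps V0) := by
  intro ms
  induction ms with
  | nil =>
    intro hms q v f f0 hsh hst hfood
    exact ⟨[], by simp, hsh, hst, fun c _ h => h, by intro c hc; simp at hc,
      fun c _ h => Or.inl h, by simp, by simp, hfood⟩
  | cons m ms ih =>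
    intro hms q v f f0 hsh hst hfood
    set n : Int × Int := (cur.1 + m.1, cur.2 + m.2) with hn
    have hadj : adjC cur n := hms m (by simp)
    by_cases hg : (isAvailable (cur.1 + m.1) (cur.2 + m.2) (gH maps) (gW maps)
        && !vGet v (cur.1 + m.1) (cur.2 + m.2)
        && !(cellChar maps (cur.1 + m.1) (cur.2 + m.2) == 'X')) = true
    · -- push n
      have hstep : bfsStep maps (gH maps) (gW maps) cur.1 cur.2 (q, v, f) m
          = (q ++ [n], vSet v n.1 n.2, f + cellVal maps n.1 n.2) := by
        simp only [bfsStep, hg, if_true, hn]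
      simp only [Bool.and_eq_true, Bool.not_eq_true'] at hg
      have hokn : okCell maps n := (okCell_iff_guard maps n).2 ⟨hg.1.1, hg.2⟩
      have hnotv : vGet v n.1 n.2 = false := hg.1.2
      have hngrid : n ∈ gridFin maps := ok_mem_gridFin maps n hokn
      have hV0n : V0 n = false := by
        by_contra h
        have := hst.mono n hngrid (by revert h; cases V0 n <;> simp)
        rw [hnotv] at this; exact absurd this (by simp)
      have hreachn : ReachP maps V0 s n := ReachP.step hcurre hadj hokn hV0n
      have hmark : ∀ c : Int × Int, c ∈ gridFin maps →
          vGet (vSet v n.1 n.2) c.1 c.2 = if c = n then true else vGet v c.1 c.2 := by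
        intro c hc
        rw [mem_gridFin] at hc
        obtain ⟨o1, o2, o3, o4, _⟩ := hokn
        rw [vGet_vSet maps v hsh n.1 n.2 o1 o2 o3 o4 c.1 c.2 hc.1 hc.2.2.1]
        by_cases hcn : c = n
        · simp [hcn]
        · have : ¬ (c.1 = n.1 ∧ c.2 = n.2) := by
            intro hh; exact hcn (Prod.ext hh.1 hh.2)
          simp [hcn, this]
      obtain ⟨hvf, hnmem⟩ := visFin_insert_of_mark maps _ _ n hngrid hnotv hmark
      have hsh' : Shape maps (vSet v n.1 n.2) := shape_vSet maps v hsh n.1 n.2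
      have hst' : StInv maps V0 s (fun c => vGet (vSet v n.1 n.2) c.1 c.2) := by
        constructor
        · intro c hc hv0
          rw [hmark c hc]
          by_cases hcn : c = n
          · simp [hcn]
          · simp only [hcn, if_false]; exact hst.mono c hc hv0
        · rw [hmark s (ok_mem_gridFin maps s hst.sok)]
          by_cases hsn : s = n
          · simp [hsn]
          · simp only [hsn, if_false]; exact hst.svis
        · exact hst.sok
        · exact hst.snew
        · intro c hc hv
          rw [hmark c hc] at hv
          by_cases hcn : c = n
          · subst hcn; exact Or.inr ⟨hokn, hV0n, hreachn⟩
          · simp only [hcn, if_false] at hv; exact hst.sound c hc hv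
      have hnV0fin : n ∉ visFin maps V0 := by
        rw [mem_visFin]; rintro ⟨_, h⟩; rw [hV0n] at h; exact absurd h (by simp)
      have hfood' : f + cellVal maps n.1 n.2
          = f0 + sumVal maps (visFin maps (fun c => vGet (vSet v n.1 n.2) c.1 c.2) \ visFin maps V0) := by
        rw [hvf, sum_after_mark maps _ _ n hnmem hnV0fin, hfood]; ring
      obtain ⟨ext', he1, he2, he3, he4, he5, he6, he7, he8, he9⟩ :=
        ih (fun m' hm' => hms m' (by simp [hm'])) (q ++ [n]) (vSet v n.1 n.2)
          (f + cellVal maps n.1 n.2) f0 hsh' hst' hfood'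
      have hfold : (m :: ms).foldl (bfsStep maps (gH maps) (gW maps) cur.1 cur.2) (q, v, f)
          = ms.foldl (bfsStep maps (gH maps) (gW maps) cur.1 cur.2) (q ++ [n], vSet v n.1 n.2, f + cellVal maps n.1 n.2) := by
        rw [List.foldl_cons, hstep]
      refine ⟨n :: ext', ?_, ?_, ?_, ?_, ?_, ?_, ?_, ?_, ?_⟩
      · rw [hfold, he1]; simp
      · rw [hfold]; exact he2
      · rw [hfold]; exact he3
      · intro c hc hv
        rw [hfold]
        apply he4 c hc
        rw [hmark c hc]
        by_cases hcn : c = n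
        · simp [hcn]
        · simp [hcn, hv]
      · intro c hc
        rw [hfold]
        rcases List.mem_cons.1 hc with rfl | hc'
        · refine ⟨?_, hV0n, hokn⟩
          apply he4 n hngrid
          rw [hmark n hngrid]; simp
        · exact he5 c hc'
      · intro c hc hv
        rw [hfold] at hv
        rcases he6 c hc hv with h | h
        · rw [hmark c hc] at h
          by_cases hcn : c = n
          · exact Or.inr (by simp [hcn])
          · simp only [hcn, if_false] at h; exact Or.inl h
        · exact Or.inr (by simp [h])
      · intro m' hm' hokm'
        rw [hfold]
        rcases List.mem_cons.1 hm' with rfl | hm''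
        · apply he4 _ hngrid
          rw [hmark _ hngrid]; simp
        · exact he7 m' hm'' hokm'
      · rw [hfold, he8, hvf, Finset.card_insert_of_notMem hnmem]; simp only [List.length_cons]; omega
      · rw [hfold]; exact he9
    · -- no push
      have hstep : bfsStep maps (gH maps) (gW maps) cur.1 cur.2 (q, v, f) m = (q, v, f) := by
        simp only [bfsStep, hg]; simp
      obtain ⟨ext, he1, he2, he3, he4, he5, he6, he7, he8, he9⟩ :=
        ih (fun m' hm' => hms m' (by simp [hm'])) q v f f0 hsh hst hfood
      have hfold : (m :: ms).foldl (bfsStep maps (gH maps) (gW maps) cur.1 cur.2) (q, v, f)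
          = ms.foldl (bfsStep maps (gH maps) (gW maps) cur.1 cur.2) (q, v, f) := by
        rw [List.foldl_cons, hstep]
      refine ⟨ext, by rw [hfold]; exact he1, by rw [hfold]; exact he2, by rw [hfold]; exact he3,
        by rw [hfold]; exact he4, by rw [hfold]; exact he5, by rw [hfold]; exact he6, ?_,
        by rw [hfold]; exact he8, by rw [hfold]; exact he9⟩
      intro m' hm' hokm'
      rw [hfold]
      rcases List.mem_cons.1 hm' with rfl | hm''
      · -- guard failed though the cell is ok: it must already be visited
        have hguard := (okCell_iff_guard maps (cur.1 + m'.1, cur.2 + m'.2)).1 hokm'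
        have hvis : vGet v (cur.1 + m'.1) (cur.2 + m'.2) = true := by
          by_contra hvv
          apply hg
          simp only [Bool.and_eq_true, Bool.not_eq_true']
          exact ⟨⟨hguard.1, by revert hvv; cases vGet v (cur.1 + m'.1) (cur.2 + m'.2) <;> simp⟩, hguard.2⟩
        exact he4 _ (ok_mem_gridFin maps _ hokm') hvis
      · exact he7 m' hm'' hokm'
theorem movesA_adj (cur : Int × Int) : ∀ m ∈ movesA, adjC cur (cur.1 + m.1, cur.2 + m.2) := by
  intro m hm
  simp only [movesA, List.mem_cons, List.not_mem_nil, or_false] at hm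
  rcases hm with rfl | rfl | rfl | rfl
  · exact Or.inr (Or.inr (Or.inl (by simp)))
  · exact Or.inr (Or.inr (Or.inr (by simp; ring)))
  · exact Or.inl (by simp)
  · exact Or.inr (Or.inl (by simp; ring))

theorem adj_movesA (cur n : Int × Int) (h : adjC cur n) :
    ∃ m ∈ movesA, n = (cur.1 + m.1, cur.2 + m.2) := by
  rcases h with h | h | h | h
  · exact ⟨(1, 0), by simp [movesA], by simp [h]⟩
  · exact ⟨(-1, 0), by simp [movesA], by simp [h]; ring⟩
  · exact ⟨(0, 1), by simp [movesA], by simp [h]⟩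
  · exact ⟨(0, -1), by simp [movesA], by simp [h]; ring⟩

theorem reach_of_winv (maps : List String) (V0 : Int × Int → Bool) (s : Int × Int)
    (p : Int × Int → Bool) (hst : StInv maps V0 s p) (c : Int × Int)
    (hp : p c = true) (hv0 : V0 c = false) (hok : okCell maps c) :
    ReachP maps V0 s c := by
  rcases hst.sound c (ok_mem_gridFin maps c hok) hp with h | ⟨_, _, h⟩
  · rw [hv0] at h; exact absurd h (by simp)
  · exact h

theorem bfsLoop_spec (maps : List String) (V0 : Int × Int → Bool) (s : Int × Int) :
    ∀ (fuel : Nat) (q : List (Int × Int)) (v : List (List Bool)) (f f0 : Int)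
      (hsh : Shape maps v) (hst : StInv maps V0 s (fun c => vGet v c.1 c.2))
      (hq : WInv maps V0 (fun c => vGet v c.1 c.2) q)
      (hcl : ClosedExcept maps V0 (fun c => vGet v c.1 c.2) q)
      (hfood : f = f0 + sumVal maps (visFin maps (fun c => vGet v c.1 c.2) \ visFin maps V0))
      (hfuel : q.length + (gH maps * gW maps - (visFin maps (fun c => vGet v c.1 c.2)).card) ≤ fuel),
    Shape maps (bfsLoop maps (gH maps) (gW maps) fuel q v f).1 ∧
    (∀ c ∈ gridFin maps,
      (vGet (bfsLoop maps (gH maps) (gW maps) fuel q v f).1 c.1 c.2 = true ↔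
        V0 c = true ∨ ReachP maps V0 s c)) ∧
    (bfsLoop maps (gH maps) (gW maps) fuel q v f).2
      = f0 + sumVal maps (visFin maps (fun c => vGet (bfsLoop maps (gH maps) (gW maps) fuel q v f).1 c.1 c.2) \ visFin maps V0) := by
  intro fuel
  induction fuel with
  | zero =>
    intro q v f f0 hsh hst hq hcl hfood hfuel
    have hcard := visFin_card_le maps (fun c => vGet v c.1 c.2)
    have hql : q.length = 0 := by omega
    have hqnil : q = [] := List.length_eq_zero_iff.1 hql
    subst hqnil
    exact ⟨hsh, final_char maps V0 s _ hst hcl, hfood⟩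
  | succ fuel ih =>
    intro q v f f0 hsh hst hq hcl hfood hfuel
    cases q with
    | nil =>
      simp only [bfsLoop]
      exact ⟨hsh, final_char maps V0 s _ hst hcl, hfood⟩
    | cons c rest =>
      obtain ⟨hpc, hv0c, hokc⟩ := hq c (by simp)
      have hav : isAvailable c.1 c.2 (gH maps) (gW maps) = true :=
        ((okCell_iff_guard maps c).1 hokc).1
      have hreachc : ReachP maps V0 s c := reach_of_winv maps V0 s _ hst c hpc hv0c hokc
      obtain ⟨ext, he1, he2, he3, he4, he5, he6, he7, he8, he9⟩ :=
        foldA_spec maps V0 s c hokc hreachc movesA (movesA_adj c) rest v f f0 hsh hst hfood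
      have hloop : bfsLoop maps (gH maps) (gW maps) (fuel + 1) (c :: rest) v f
          = bfsLoop maps (gH maps) (gW maps) fuel
              (movesA.foldl (bfsStep maps (gH maps) (gW maps) c.1 c.2) (rest, v, f)).1
              (movesA.foldl (bfsStep maps (gH maps) (gW maps) c.1 c.2) (rest, v, f)).2.1
              (movesA.foldl (bfsStep maps (gH maps) (gW maps) c.1 c.2) (rest, v, f)).2.2 := by
        simp only [bfsLoop, hav, Bool.not_true]
        simp
      rw [hloop]
      set r := movesA.foldl (bfsStep maps (gH maps) (gW maps) c.1 c.2) (rest, v, f) with hr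
      have hcard := visFin_card_le maps (fun c => vGet r.2.1 c.1 c.2)
      apply ih r.1 r.2.1 r.2.2 f0 he2 he3
      · -- WInv
        rw [he1]
        intro c' hc'
        rcases List.mem_append.1 hc' with h | h
        · obtain ⟨hp', hv0', hok'⟩ := hq c' (by simp [h])
          exact ⟨he4 c' (ok_mem_gridFin maps c' hok') hp', hv0', hok'⟩
        · exact he5 c' h
      · -- ClosedExcept
        rw [he1]
        intro c' hc' hp' hv0' hnq n hadj hokn
        rcases he6 c' hc' hp' with hold | hext
        · by_cases hcc : c' ∈ c :: rest
          · rcases List.mem_cons.1 hcc with rfl | hcr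
            · obtain ⟨m, hm, rfl⟩ := adj_movesA c' n hadj
              exact he7 m hm hokn
            · exact absurd (List.mem_append.2 (Or.inl hcr)) hnq
          · exact he4 n (ok_mem_gridFin maps n hokn)
              (hcl c' hc' hold hv0' hcc n hadj hokn)
        · exact absurd (List.mem_append.2 (Or.inr hext)) hnq
      · exact he9
      · rw [he1, he8]
        simp only [List.length_append, List.length_cons] at hfuel ⊢
        omega

-- ========== connectivity, components, canonical seed list ==========

theorem adjC_symm (c n : Int × Int) (h : adjC c n) : adjC n c := by
  rcases h with h | h | h | h
  · exact Or.inr (Or.inl (by simp [h]))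
  · exact Or.inl (by simp [h])
  · exact Or.inr (Or.inr (Or.inr (by simp [h])))
  · exact Or.inr (Or.inr (Or.inl (by simp [h])))

def Conn (maps : List String) (a b : Int × Int) : Prop :=
  okCell maps a ∧ ReachP maps (fun _ => false) a b

theorem conn_refl (maps : List String) (a : Int × Int) (h : okCell maps a) : Conn maps a a :=
  ⟨h, ReachP.base⟩

theorem conn_ok_right (maps : List String) (a b : Int × Int) (h : Conn maps a b) :
    okCell maps b := by
  obtain ⟨hok, hr⟩ := h
  induction hr with
  | base => exact hok
  | step _ _ hokn _ _ => exact hokn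

theorem conn_step (maps : List String) (a b n : Int × Int) (h : Conn maps a b)
    (hadj : adjC b n) (hok : okCell maps n) : Conn maps a n :=
  ⟨h.1, ReachP.step h.2 hadj hok rfl⟩

theorem conn_trans (maps : List String) (a b c : Int × Int)
    (h1 : Conn maps a b) (h2 : Conn maps b c) : Conn maps a c := by
  obtain ⟨hokb, hr⟩ := h2
  induction hr with
  | base => exact h1
  | step _ hadj hok _ ih => exact conn_step maps a _ _ ih hadj hok

theorem conn_symm (maps : List String) (a b : Int × Int) (h : Conn maps a b) :
    Conn maps b a := by
  obtain ⟨hok, hr⟩ := h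
  induction hr with
  | base => exact conn_refl maps a hok
  | step hr hadj hokn ih1 ih2 =>
    exact conn_trans maps _ _ _ (conn_step maps _ _ _ (conn_refl maps _ hokn)
      (adjC_symm _ _ hadj) (by exact conn_ok_right maps _ _ ⟨hok, hr⟩)) ih2

theorem conn_adj (maps : List String) (a b : Int × Int) (ha : okCell maps a)
    (hb : okCell maps b) (hadj : adjC a b) : Conn maps a b :=
  conn_step maps a a b (conn_refl maps a ha) hadj hb

-- a visited predicate that is a union of components lets the region fill reach the whole
-- component of its seed and nothing else
theorem reachP_iff_conn (maps : List String) (V0 : Int × Int → Bool) (s : Int × Int)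
    (hok : okCell maps s) (hs : V0 s = false)
    (hcl : ∀ c n, okCell maps c → V0 c = true → adjC c n → okCell maps n → V0 n = true) :
    ∀ c, (ReachP maps V0 s c ↔ Conn maps s c) ∧ (Conn maps s c → V0 c = false) := by
  have hfalse : ∀ c, Conn maps s c → V0 c = false ∧ ReachP maps V0 s c := by
    intro c hc
    obtain ⟨_, hr⟩ := hc
    induction hr with
    | base => exact ⟨hs, ReachP.base⟩
    | @step c' n' hr' hadj hokn hf ih =>
      have hVn : V0 n' = false := by
        by_contra h
        have h' : V0 n' = true := by revert h; cases V0 n' <;> simp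
        have := hcl n' c' hokn h' (adjC_symm c' n' hadj) (conn_ok_right maps s c' ⟨hok, hr'⟩)
        rw [ih.1] at this; exact absurd this (by simp)
      exact ⟨hVn, ReachP.step ih.2 hadj hokn hVn⟩
  intro c
  refine ⟨⟨?_, fun h => (hfalse c h).2⟩, fun h => (hfalse c h).1⟩
  intro hr
  induction hr with
  | base => exact conn_refl maps s hok
  | step _ hadj hokn _ ih => exact conn_step maps _ _ _ ih hadj hokn

noncomputable def pfilter (P : (Int × Int) → Prop) (s : Finset (Int × Int)) :
    Finset (Int × Int) :=
  @Finset.filter _ P (fun c => Classical.propDecidable _) s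

theorem mem_pfilter (P : (Int × Int) → Prop) (s : Finset (Int × Int)) (c : Int × Int) :
    c ∈ pfilter P s ↔ c ∈ s ∧ P c := by
  simp [pfilter, Finset.mem_filter]

noncomputable def clsFin (maps : List String) (s : Int × Int) : Finset (Int × Int) :=
  pfilter (fun c => Conn maps s c) (gridFin maps)

theorem mem_clsFin (maps : List String) (s c : Int × Int) :
    c ∈ clsFin maps s ↔ Conn maps s c := by
  rw [clsFin, mem_pfilter]
  exact ⟨fun h => h.2, fun h => ⟨ok_mem_gridFin maps c (conn_ok_right maps s c h), h⟩⟩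

noncomputable def sumCls (maps : List String) (s : Int × Int) : Int :=
  sumVal maps (clsFin maps s)

noncomputable def isSeed (maps : List String) (acc : List (Int × Int)) (c : Int × Int) : Bool :=
  @decide (okCell maps c ∧ ∀ s ∈ acc, ¬ Conn maps s c) (Classical.propDecidable _)

theorem isSeed_iff (maps : List String) (acc : List (Int × Int)) (c : Int × Int) :
    isSeed maps acc c = true ↔ (okCell maps c ∧ ∀ s ∈ acc, ¬ Conn maps s c) := by
  rw [isSeed]
  exact @decide_eq_true_iff _ (Classical.propDecidable _)

noncomputable def seedsAux (maps : List String) :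
    List (Int × Int) → List (Int × Int) → List (Int × Int)
  | acc, [] => acc
  | acc, c :: rest => seedsAux maps (if isSeed maps acc c then acc ++ [c] else acc) rest

noncomputable def seeds (maps : List String) (pre : List (Int × Int)) : List (Int × Int) :=
  seedsAux maps [] pre

theorem seedsAux_append (maps : List String) (l1 l2 acc : List (Int × Int)) :
    seedsAux maps acc (l1 ++ l2) = seedsAux maps (seedsAux maps acc l1) l2 := by
  induction l1 generalizing acc with
  | nil => rfl
  | cons c l1 ih => simp only [List.cons_append, seedsAux]; exact ih _

theorem seeds_snoc (maps : List String) (pre : List (Int × Int)) (c : Int × Int) :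
    seeds maps (pre ++ [c])
      = if isSeed maps (seeds maps pre) c then seeds maps pre ++ [c] else seeds maps pre := by
  rw [seeds, seedsAux_append]; rfl

structure SeedsOK (maps : List String) (pre sds : List (Int × Int)) : Prop where
  ok : ∀ s ∈ sds, okCell maps s
  pw : sds.Pairwise (fun a b => ¬ Conn maps a b)
  cover : ∀ c ∈ pre, okCell maps c → ∃ s ∈ sds, Conn maps s c

theorem seedsOK (maps : List String) (pre : List (Int × Int)) :
    SeedsOK maps pre (seeds maps pre) := by
  induction pre using List.reverseRecOn with
  | nil => exact ⟨by simp [seeds, seedsAux], by simp [seeds, seedsAux], by simp⟩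
  | append_singleton pre c ih =>
    rw [seeds_snoc]
    by_cases h : isSeed maps (seeds maps pre) c = true
    · obtain ⟨hok, hnc⟩ := (isSeed_iff maps _ c).1 h
      rw [if_pos h]
      refine ⟨?_, ?_, ?_⟩
      · intro s hs
        rcases List.mem_append.1 hs with hs | hs
        · exact ih.ok s hs
        · simp at hs; subst hs; exact hok
      · rw [List.pairwise_append]
        exact ⟨ih.pw, by simp, by intro a ha b hb; simp at hb; subst hb; exact hnc a ha⟩
      · intro d hd hokd
        rcases List.mem_append.1 hd with hd | hd
        · obtain ⟨s, hs, hconn⟩ := ih.cover d hd hokd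
          exact ⟨s, List.mem_append.2 (Or.inl hs), hconn⟩
        · simp at hd; subst hd
          exact ⟨d, List.mem_append.2 (Or.inr (by simp)), conn_refl maps d hokd⟩
    · rw [if_neg h]
      refine ⟨ih.ok, ih.pw, ?_⟩
      intro d hd hokd
      rcases List.mem_append.1 hd with hd | hd
      · exact ih.cover d hd hokd
      · simp at hd; subst hd
        rw [isSeed_iff] at h
        by_contra hno
        push_neg at hno
        exact h ⟨hokd, fun s hs hconn => hno s hs hconn⟩

theorem seeds_unique (maps : List String) (sds : List (Int × Int))
    (hpw : sds.Pairwise (fun a b => ¬ Conn maps a b)) (s1 s2 c : Int × Int)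
    (h1 : s1 ∈ sds) (h2 : s2 ∈ sds) (hc1 : Conn maps s1 c) (hc2 : Conn maps s2 c) :
    s1 = s2 := by
  by_contra hne
  have hsym : Symmetric (fun a b : Int × Int => ¬ Conn maps a b) := by
    intro a b hab hc; exact hab (conn_symm maps b a hc)
  exact (hpw.forall hsym h1 h2 hne) (conn_trans maps s1 c s2 hc1 (conn_symm maps s2 c hc2))

def allCells (maps : List String) : List (Int × Int) :=
  (List.range (gH maps)).flatMap (fun (x : Nat) => (List.range (gW maps)).map (fun (y : Nat) => ((x : Int), (y : Int))))

theorem mem_allCells (maps : List String) (c : Int × Int) :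
    c ∈ allCells maps ↔ c ∈ gridFin maps := by
  constructor
  · intro h
    rw [allCells, List.mem_flatMap] at h
    obtain ⟨x, hx, h⟩ := h
    rw [List.mem_map] at h
    obtain ⟨y, hy, rfl⟩ := h
    rw [List.mem_range] at hx hy
    rw [mem_gridFin]
    refine ⟨Int.natCast_nonneg x, ?_, Int.natCast_nonneg y, ?_⟩
    · show ((x : Int)) < ((gH maps : Nat) : Int); exact_mod_cast hx
    · show ((y : Int)) < ((gW maps : Nat) : Int); exact_mod_cast hy
  · intro h
    rw [mem_gridFin] at h
    obtain ⟨h1, h2, h3, h4⟩ := h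
    rw [allCells, List.mem_flatMap]
    refine ⟨c.1.toNat, by rw [List.mem_range]; omega, ?_⟩
    rw [List.mem_map]
    refine ⟨c.2.toNat, by rw [List.mem_range]; omega, ?_⟩
    simp [Int.toNat_of_nonneg h1, Int.toNat_of_nonneg h3]

theorem nodup_allCells (maps : List String) : (allCells maps).Nodup := by
  rw [allCells, List.nodup_flatMap]
  refine ⟨?_, ?_⟩
  · intro x _
    exact List.Nodup.map (fun a b h => by simpa using h) List.nodup_range
  · refine List.Pairwise.imp ?_ List.nodup_range
    intro x y hxy
    intro c hcx hcy
    rw [List.mem_map] at hcx hcy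
    obtain ⟨a, _, rfl⟩ := hcx
    obtain ⟨b, _, hb⟩ := hcy
    have : (y : Int) = (x : Int) := congrArg Prod.fst hb
    exact hxy (by exact_mod_cast this.symm)

theorem foldl_flatMap' {α β σ : Type} (l : List α) (g : α → List β) (f : σ → β → σ) (init : σ) :
    (l.flatMap g).foldl f init = l.foldl (fun s a => (g a).foldl f s) init := by
  induction l generalizing init with
  | nil => rfl
  | cons a l ih => simp only [List.flatMap_cons, List.foldl_append, List.foldl_cons]; exact ih _

theorem nested_foldl {σ : Type} (maps : List String) (f : σ → (Int × Int) → σ) (init : σ) :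
    (List.range (gH maps)).foldl
      (fun st (x : Nat) => (List.range (gW maps)).foldl (fun st (y : Nat) => f st ((x : Int), (y : Int))) st) init
    = (allCells maps).foldl f init := by
  rw [allCells, foldl_flatMap']
  have h : (fun (st : σ) (x : Nat) =>
        (List.range (gW maps)).foldl (fun st (y : Nat) => f st ((x : Int), (y : Int))) st)
      = (fun (st : σ) (x : Nat) =>
        ((List.range (gW maps)).map (fun (y : Nat) => ((x : Int), (y : Int)))).foldl f st) := by
    funext st x
    rw [List.foldl_map]
  rw [h]

noncomputable def ansCanon (maps : List String) : List Int :=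
  (seeds maps (allCells maps)).map (fun s => sumCls maps s)

-- ========== A's scan produces the canonical list ==========

def stepA (maps : List String) (st : List (List Bool) × List Int) (c : Int × Int) :
    List (List Bool) × List Int :=
  if cellChar maps c.1 c.2 == 'X' || vGet st.1 c.1 c.2 then st
  else
    let v1 := vSet st.1 c.1 c.2
    let food := cellVal maps c.1 c.2
    let r := bfsLoop maps (gH maps) (gW maps) (gH maps * gW maps + 1) [c] v1 food
    (r.1, st.2 ++ [r.2])

theorem regionA_spec (maps : List String) (s : Int × Int) (vA : List (List Bool))
    (hsh : Shape maps vA) (hok : okCell maps s) (hnew : vGet vA s.1 s.2 = false) :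
    Shape maps (bfsLoop maps (gH maps) (gW maps) (gH maps * gW maps + 1) [s] (vSet vA s.1 s.2) (cellVal maps s.1 s.2)).1 ∧
    (∀ c ∈ gridFin maps,
      (vGet (bfsLoop maps (gH maps) (gW maps) (gH maps * gW maps + 1) [s] (vSet vA s.1 s.2) (cellVal maps s.1 s.2)).1 c.1 c.2 = true ↔
        vGet vA c.1 c.2 = true ∨ ReachP maps (fun c' => vGet vA c'.1 c'.2) s c)) ∧
    (bfsLoop maps (gH maps) (gW maps) (gH maps * gW maps + 1) [s] (vSet vA s.1 s.2) (cellVal maps s.1 s.2)).2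
      = sumVal maps (visFin maps (fun c => vGet (bfsLoop maps (gH maps) (gW maps) (gH maps * gW maps + 1) [s] (vSet vA s.1 s.2) (cellVal maps s.1 s.2)).1 c.1 c.2)
          \ visFin maps (fun c => vGet vA c.1 c.2)) := by
  have hsgrid : s ∈ gridFin maps := ok_mem_gridFin maps s hok
  obtain ⟨o1, o2, o3, o4, o5⟩ := hok
  have hmarkA : ∀ c : Int × Int, c ∈ gridFin maps →
      vGet (vSet vA s.1 s.2) c.1 c.2 = if c = s then true else vGet vA c.1 c.2 := by
    intro c hc
    rw [mem_gridFin] at hc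
    rw [vGet_vSet maps vA hsh s.1 s.2 o1 o2 o3 o4 c.1 c.2 hc.1 hc.2.2.1]
    by_cases hcs : c = s
    · simp [hcs]
    · have : ¬ (c.1 = s.1 ∧ c.2 = s.2) := fun hh => hcs (Prod.ext hh.1 hh.2)
      simp [hcs, this]
  have hstA : StInv maps (fun c => vGet vA c.1 c.2) s (fun c => vGet (vSet vA s.1 s.2) c.1 c.2) := by
    constructor
    · intro c hc hv0; rw [hmarkA c hc]; by_cases hcs : c = s
      · simp [hcs]
      · simpa [hcs] using hv0
    · rw [hmarkA s hsgrid]; simp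
    · exact ⟨o1, o2, o3, o4, o5⟩
    · exact hnew
    · intro c hc hv; rw [hmarkA c hc] at hv
      by_cases hcs : c = s
      · subst hcs; exact Or.inr ⟨⟨o1, o2, o3, o4, o5⟩, hnew, ReachP.base⟩
      · simp only [hcs, if_false] at hv; exact Or.inl hv
  obtain ⟨hvfA, hnmemA⟩ := visFin_insert_of_mark maps (fun c => vGet vA c.1 c.2)
    (fun c => vGet (vSet vA s.1 s.2) c.1 c.2) s hsgrid hnew hmarkA
  have hfoodA : cellVal maps s.1 s.2 = 0 + sumVal maps
      (visFin maps (fun c => vGet (vSet vA s.1 s.2) c.1 c.2) \ visFin maps (fun c => vGet vA c.1 c.2)) := by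
    rw [hvfA, sum_after_mark maps _ _ s hnmemA hnmemA, Finset.sdiff_self]
    simp [sumVal]
  have hwA : WInv maps (fun c => vGet vA c.1 c.2) (fun c => vGet (vSet vA s.1 s.2) c.1 c.2) [s] := by
    intro c hc
    have : c = s := by simpa using hc
    subst this
    refine ⟨?_, hnew, ⟨o1, o2, o3, o4, o5⟩⟩
    show vGet (vSet vA c.1 c.2) c.1 c.2 = true
    rw [hmarkA c hsgrid]; simp
  have hclA : ClosedExcept maps (fun c => vGet vA c.1 c.2)
      (fun c => vGet (vSet vA s.1 s.2) c.1 c.2) [s] := by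
    intro c hc hp hv0 hnq n hadj hokn
    simp only at hp hv0 ⊢
    rw [hmarkA c hc] at hp
    by_cases hcs : c = s
    · exact absurd (by simp [hcs]) hnq
    · simp only [hcs, if_false] at hp; rw [hp] at hv0; exact absurd hv0 (by simp)
  have hfuelA : ([s] : List (Int × Int)).length
      + (gH maps * gW maps - (visFin maps (fun c => vGet (vSet vA s.1 s.2) c.1 c.2)).card)
      ≤ gH maps * gW maps + 1 := by
    have := visFin_card_le maps (fun c => vGet (vSet vA s.1 s.2) c.1 c.2)
    simp only [List.length_cons, List.length_nil]
    omega
  obtain ⟨hA1, hA2, hA3⟩ := bfsLoop_spec maps (fun c => vGet vA c.1 c.2) s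
    (gH maps * gW maps + 1) [s] (vSet vA s.1 s.2) (cellVal maps s.1 s.2) 0
    (shape_vSet maps vA hsh s.1 s.2) hstA hwA hclA hfoodA hfuelA
  refine ⟨hA1, hA2, ?_⟩
  rw [hA3]; ring

def InvA (maps : List String) (pre : List (Int × Int)) (st : List (List Bool) × List Int) : Prop :=
  Shape maps st.1 ∧
  (∀ c ∈ gridFin maps, (vGet st.1 c.1 c.2 = true ↔ ∃ s ∈ seeds maps pre, Conn maps s c)) ∧
  st.2 = (seeds maps pre).map (fun s => sumCls maps s)

theorem stepA_inv (maps : List String) (pre : List (Int × Int)) (st : List (List Bool) × List Int)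
    (c : Int × Int) (hc : c ∈ gridFin maps) (hinv : InvA maps pre st) :
    InvA maps (pre ++ [c]) (stepA maps st c) := by
  obtain ⟨hsh, hvis, hans⟩ := hinv
  rw [InvA, seeds_snoc]
  by_cases hX : (cellChar maps c.1 c.2 == 'X') = true
  · have hnok : ¬ okCell maps c := fun h => h.2.2.2.2 (by simpa using hX)
    have hseed : isSeed maps (seeds maps pre) c = false :=
      Bool.eq_false_iff.2 (fun h => hnok ((isSeed_iff _ _ _).1 h).1)
    have hstep : stepA maps st c = st := by simp [stepA, hX]
    rw [hseed, hstep]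
    simp only [Bool.false_eq_true, if_false]
    exact ⟨hsh, hvis, hans⟩
  · by_cases hV : vGet st.1 c.1 c.2 = true
    · obtain ⟨s0, hs0, hconn0⟩ := (hvis c hc).1 hV
      have hseed : isSeed maps (seeds maps pre) c = false :=
        Bool.eq_false_iff.2 (fun h => ((isSeed_iff _ _ _).1 h).2 s0 hs0 hconn0)
      have hstep : stepA maps st c = st := by simp [stepA, hV]
      rw [hseed, hstep]
      simp only [Bool.false_eq_true, if_false]
      exact ⟨hsh, hvis, hans⟩
    · have hokc : okCell maps c := by
        rw [mem_gridFin] at hc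
        exact ⟨hc.1, hc.2.1, hc.2.2.1, hc.2.2.2, by simpa using hX⟩
      have hVf : vGet st.1 c.1 c.2 = false := by
        revert hV; cases vGet st.1 c.1 c.2 <;> simp
      have hseed : isSeed maps (seeds maps pre) c = true := by
        rw [isSeed_iff]
        exact ⟨hokc, fun s hs hcon => hV ((hvis c hc).2 ⟨s, hs, hcon⟩)⟩
      rw [hseed]
      simp only [if_true]
      have hstep : stepA maps st c
          = ((bfsLoop maps (gH maps) (gW maps) (gH maps * gW maps + 1) [c] (vSet st.1 c.1 c.2) (cellVal maps c.1 c.2)).1,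
             st.2 ++ [(bfsLoop maps (gH maps) (gW maps) (gH maps * gW maps + 1) [c] (vSet st.1 c.1 c.2) (cellVal maps c.1 c.2)).2]) := by
        simp [stepA, hX, hVf]
      obtain ⟨hr1, hr2, hr3⟩ := regionA_spec maps c st.1 hsh hokc hVf
      have hclosed : ∀ d n, okCell maps d → vGet st.1 d.1 d.2 = true → adjC d n →
          okCell maps n → vGet st.1 n.1 n.2 = true := by
        intro d n hokd hVd hadj hokn
        obtain ⟨s0, hs0, hconn0⟩ := (hvis d (ok_mem_gridFin maps d hokd)).1 hVd
        exact (hvis n (ok_mem_gridFin maps n hokn)).2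
          ⟨s0, hs0, conn_step maps s0 d n hconn0 hadj hokn⟩
      have hiff := reachP_iff_conn maps (fun c' => vGet st.1 c'.1 c'.2) c hokc hVf
        (fun d n hokd hVd hadj hokn => hclosed d n hokd hVd hadj hokn)
      rw [hstep]
      refine ⟨hr1, ?_, ?_⟩
      · intro d hd
        rw [hr2 d hd]
        constructor
        · rintro (h | h)
          · obtain ⟨s0, hs0, hconn0⟩ := (hvis d hd).1 h
            exact ⟨s0, List.mem_append.2 (Or.inl hs0), hconn0⟩
          · exact ⟨c, List.mem_append.2 (Or.inr (by simp)), ((hiff d).1).1 h⟩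
        · rintro ⟨s0, hs0, hconn0⟩
          rcases List.mem_append.1 hs0 with hs0 | hs0
          · exact Or.inl ((hvis d hd).2 ⟨s0, hs0, hconn0⟩)
          · have : s0 = c := by simpa using hs0
            subst this
            exact Or.inr (((hiff d).1).2 hconn0)
      · show st.2 ++ _ = _
        rw [hans, List.map_append, List.map_singleton]
        have hset : (visFin maps (fun c' => vGet (bfsLoop maps (gH maps) (gW maps) (gH maps * gW maps + 1) [c] (vSet st.1 c.1 c.2) (cellVal maps c.1 c.2)).1 c'.1 c'.2))
            \ visFin maps (fun c' => vGet st.1 c'.1 c'.2) = clsFin maps c := by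
          apply Finset.ext
          intro d
          rw [Finset.mem_sdiff, mem_visFin, mem_visFin, mem_clsFin]
          constructor
          · rintro ⟨⟨hdg, hdv⟩, hnd⟩
            rcases (hr2 d hdg).1 hdv with h | h
            · exact absurd ⟨hdg, h⟩ hnd
            · exact ((hiff d).1).1 h
          · intro hconn
            have hokd := conn_ok_right maps c d hconn
            have hdg := ok_mem_gridFin maps d hokd
            have hdf : vGet st.1 d.1 d.2 = false := (hiff d).2 hconn
            refine ⟨⟨hdg, (hr2 d hdg).2 (Or.inr (((hiff d).1).2 hconn))⟩, ?_⟩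
            rintro ⟨_, hdv⟩
            rw [hdf] at hdv
            exact absurd hdv (by simp)
        rw [hr3, sumCls, hset]

theorem foldA_inv (maps : List String) :
    ∀ (l pre : List (Int × Int)) (st : List (List Bool) × List Int),
      (∀ c ∈ l, c ∈ gridFin maps) → InvA maps pre st →
      InvA maps (pre ++ l) (l.foldl (stepA maps) st) := by
  intro l
  induction l with
  | nil => intro pre st _ h; simpa using h
  | cons c l ih =>
    intro pre st hl hinv
    have := ih (pre ++ [c]) (stepA maps st c) (fun d hd => hl d (by simp [hd]))
      (stepA_inv maps pre st c (hl c (by simp)) hinv)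
    simpa using this

theorem solutionA_canon (maps : List String) :
    solution maps = (if ansCanon maps = [] then [-1]
      else PySem.List.sorted (ansCanon maps) (fun x => x) false) := by
  have hrow : ∀ (r : List Bool), (∀ b ∈ r, b = false) → ∀ j : Nat, r.getD j false = false := by
    intro r hr j
    rw [List.getD_eq_getElem?_getD]
    cases h : r[j]? with
    | none => rfl
    | some b => simp [hr b (List.mem_of_getElem? h)]
  have hinit_false : ∀ (a b : Int),
      vGet ((List.range (gH maps)).map fun _ => (List.range (gW maps)).map fun _ => false) a b = false := by
    intro a b
    have h2 : ((List.range (gH maps)).map fun _ => (List.range (gW maps)).map fun _ => false).getD a.toNat []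
        = (((List.range (gH maps)).map fun _ => (List.range (gW maps)).map fun _ => false)[a.toNat]?).getD [] :=
      List.getD_eq_getElem?_getD
    rw [vGet, h2]
    cases h : ((List.range (gH maps)).map fun _ => (List.range (gW maps)).map fun _ => false)[a.toNat]? with
    | none => simp
    | some r =>
      have hr : r ∈ (List.range (gH maps)).map fun _ => (List.range (gW maps)).map fun _ => false :=
        List.mem_of_getElem? h
      obtain ⟨_, _, rfl⟩ := List.mem_map.1 hr
      simp only [Option.getD_some]
      apply hrow
      intro b hb
      obtain ⟨_, _, rfl⟩ := List.mem_map.1 hb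
      rfl
  have hsh0 : Shape maps ((List.range (gH maps)).map fun _ => (List.range (gW maps)).map fun _ => false) := by
    constructor
    · simp
    · intro r hr
      obtain ⟨_, _, rfl⟩ := List.mem_map.1 hr
      simp
  have hinv0 : InvA maps [] (((List.range (gH maps)).map fun _ => (List.range (gW maps)).map fun _ => false), []) := by
    refine ⟨hsh0, ?_, ?_⟩
    · intro c _
      rw [hinit_false c.1 c.2]
      constructor
      · intro h; exact absurd h (by simp)
      · rintro ⟨s, hs, _⟩
        exact absurd hs (by simp [seeds, seedsAux])
    · simp [seeds, seedsAux]
  have hscan : (fun (st : List (List Bool) × List Int) (x : Nat) =>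
        (List.range (gW maps)).foldl (scanA maps x) st)
      = (fun (st : List (List Bool) × List Int) (x : Nat) => (List.range (gW maps)).foldl
          (fun st (y : Nat) => stepA maps st ((x : Int), (y : Int))) st) := rfl
  have hfold := foldA_inv maps (allCells maps) []
    (((List.range (gH maps)).map fun _ => (List.range (gW maps)).map fun _ => false), [])
    (fun d hd => (mem_allCells maps d).1 hd) hinv0
  rw [show ([] : List (Int × Int)) ++ allCells maps = allCells maps from by simp] at hfold
  obtain ⟨_, _, hans⟩ := hfold
  show (if ((List.range (gH maps)).foldl (fun st x => (List.range (gW maps)).foldl (scanA maps x) st)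
        (((List.range (gH maps)).map fun _ => (List.range (gW maps)).map fun _ => false), [])).2.length = 0
      then [-1]
      else PySem.List.sorted _ (fun x => x) false) = _
  rw [hscan, nested_foldl maps (stepA maps), hans, ← ansCanon]
  by_cases hnil : ansCanon maps = []
  · simp [hnil]
  · simp [hnil, List.length_eq_zero_iff]

-- ========== B: union-find computes the same components ==========

def pstepUF (p : PySem.Dict (Int × Int) (Int × Int)) (c : Int × Int) : Int × Int := p.getD c c

def isRootUF (p : PySem.Dict (Int × Int) (Int × Int)) (c : Int × Int) : Prop := pstepUF p c = c

theorem iterate_root (p : PySem.Dict (Int × Int) (Int × Int)) (r : Int × Int)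
    (h : isRootUF p r) : ∀ m, (pstepUF p)^[m] r = r := by
  intro m
  induction m with
  | zero => rfl
  | succ m ih => rw [Function.iterate_succ_apply, h, ih]

theorem findUF_eq (p : PySem.Dict (Int × Int) (Int × Int)) :
    ∀ (fuel m : Nat) (c r : Int × Int), m < fuel → (pstepUF p)^[m] c = r → isRootUF p r →
      findUF p fuel c = r := by
  intro fuel
  induction fuel with
  | zero => intro m c r hm; omega
  | succ fuel ih =>
    intro m c r hm hit hr
    by_cases hc : p.getD c c = c
    · have : (pstepUF p)^[m] c = c := iterate_root p c hc m
      rw [this] at hit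
      subst hit
      simp [findUF, hc]
    · have hm1 : m ≠ 0 := by
        rintro rfl
        rw [Function.iterate_zero_apply] at hit
        subst hit
        exact hc hr
      obtain ⟨m', rfl⟩ : ∃ m', m = m' + 1 := ⟨m - 1, by omega⟩
      rw [Function.iterate_succ_apply] at hit
      show (if p.getD c c = c then c else findUF p fuel (p.getD c c)) = r
      rw [if_neg hc]
      exact ih m' (pstepUF p c) r (by omega) hit hr

def Finds (p : PySem.Dict (Int × Int) (Int × Int)) (c r : Int × Int) : Prop :=
  ∃ m, (pstepUF p)^[m] c = r ∧ isRootUF p r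

theorem finds_unique (p : PySem.Dict (Int × Int) (Int × Int)) (c r1 r2 : Int × Int)
    (h1 : Finds p c r1) (h2 : Finds p c r2) : r1 = r2 := by
  obtain ⟨m1, hit1, hr1⟩ := h1
  obtain ⟨m2, hit2, hr2⟩ := h2
  rcases Nat.le_total m1 m2 with h | h
  · obtain ⟨d, rfl⟩ : ∃ d, m2 = d + m1 := ⟨m2 - m1, by omega⟩
    rw [Function.iterate_add_apply, hit1, iterate_root p r1 hr1 d] at hit2
    exact hit2
  · obtain ⟨d, rfl⟩ : ∃ d, m1 = d + m2 := ⟨m1 - m2, by omega⟩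
    rw [Function.iterate_add_apply, hit2, iterate_root p r2 hr2 d] at hit1
    exact hit1.symm

noncomputable def nOk (maps : List String) : Nat :=
  (pfilter (fun c => okCell maps c) (gridFin maps)).card

noncomputable def rootsFin (maps : List String) (p : PySem.Dict (Int × Int) (Int × Int)) :
    Finset (Int × Int) :=
  pfilter (fun c => okCell maps c ∧ isRootUF p c) (gridFin maps)

theorem mem_rootsFin (maps : List String) (p : PySem.Dict (Int × Int) (Int × Int))
    (c : Int × Int) :
    c ∈ rootsFin maps p ↔ c ∈ gridFin maps ∧ okCell maps c ∧ isRootUF p c := by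
  unfold rootsFin
  rw [mem_pfilter]

structure UFI (maps : List String) (p : PySem.Dict (Int × Int) (Int × Int)) (k : Nat) : Prop where
  dom : ∀ c, okCell maps c → (p.get? c).isSome = true
  val : ∀ c d, p.get? c = some d → Conn maps c d
  reach : ∀ c, okCell maps c → ∃ r m, m ≤ k ∧ (pstepUF p)^[m] c = r ∧ isRootUF p r
  bound : k + (rootsFin maps p).card ≤ nOk maps

theorem nOk_le (maps : List String) : nOk maps ≤ gH maps * gW maps := by
  rw [nOk, ← card_gridFin]
  exact Finset.card_le_card (fun c hc => ((mem_pfilter _ _ c).1 hc).1)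

theorem UFI_find (maps : List String) (p : PySem.Dict (Int × Int) (Int × Int)) (k : Nat)
    (hufi : UFI maps p k) (c : Int × Int) (hok : okCell maps c) :
    Finds p c (findUF p (ufFuel maps) c) := by
  obtain ⟨r, m, hm, hit, hr⟩ := hufi.reach c hok
  have hk : k ≤ nOk maps := by have := hufi.bound; omega
  have : m < ufFuel maps := by
    have := nOk_le maps
    rw [ufFuel]; omega
  rw [findUF_eq p (ufFuel maps) m c r this hit hr]
  exact ⟨m, hit, hr⟩

theorem finds_conn (maps : List String) (p : PySem.Dict (Int × Int) (Int × Int))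
    (hdom : ∀ c, okCell maps c → (p.get? c).isSome = true)
    (hval : ∀ c d, p.get? c = some d → Conn maps c d) :
    ∀ (m : Nat) (c r : Int × Int), okCell maps c → (pstepUF p)^[m] c = r → Conn maps c r := by
  intro m
  induction m with
  | zero => intro c r hok hit; rw [Function.iterate_zero_apply] at hit; subst hit; exact conn_refl maps c hok
  | succ m ih =>
    intro c r hok hit
    rw [Function.iterate_succ_apply] at hit
    obtain ⟨d, hd⟩ : ∃ d, p.get? c = some d := by
      have := hdom c hok
      cases h : p.get? c with
      | none => rw [h] at this; simp at this
      | some d => exact ⟨d, rfl⟩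
    have hpc : pstepUF p c = d := by
      rw [pstepUF, PySem.Dict.getD_eq_get?_getD, hd]; rfl
    have hcd : Conn maps c d := hval c d hd
    rw [hpc] at hit
    exact conn_trans maps c d r hcd (ih d r (conn_ok_right maps c d hcd) hit)

theorem pstep_insert (p : PySem.Dict (Int × Int) (Int × Int)) (ra rb x : Int × Int) :
    pstepUF (p.insert ra rb) x = if x = ra then rb else pstepUF p x := by
  rw [pstepUF, PySem.Dict.getD_insert, pstepUF]

theorem transfer (p : PySem.Dict (Int × Int) (Int × Int)) (ra rb : Int × Int)
    (hra : isRootUF p ra) (hrb : isRootUF p rb) (hne : ra ≠ rb) :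
    ∀ (m : Nat) (c r : Int × Int), (pstepUF p)^[m] c = r → isRootUF p r →
      ∃ m' ≤ m + 1, (pstepUF (p.insert ra rb))^[m'] c = (if r = ra then rb else r) ∧
        isRootUF (p.insert ra rb) (if r = ra then rb else r) := by
  have hrb' : isRootUF (p.insert ra rb) rb := by
    show pstepUF (p.insert ra rb) rb = rb
    rw [pstep_insert, if_neg (fun h => hne h.symm)]
    exact hrb
  have hroot_other : ∀ r : Int × Int, isRootUF p r → r ≠ ra → isRootUF (p.insert ra rb) r := by
    intro r hr hne'
    show pstepUF (p.insert ra rb) r = r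
    rw [pstep_insert, if_neg hne']
    exact hr
  have hbase : ∀ c : Int × Int, isRootUF p c →
      ∃ m' ≤ 1, (pstepUF (p.insert ra rb))^[m'] c = (if c = ra then rb else c) ∧
        isRootUF (p.insert ra rb) (if c = ra then rb else c) := by
    intro c hc
    by_cases hcra : c = ra
    · subst hcra
      rw [if_pos rfl]
      refine ⟨1, by omega, ?_, hrb'⟩
      rw [Function.iterate_one, pstep_insert, if_pos rfl]
    · rw [if_neg hcra]
      exact ⟨0, by omega, rfl, hroot_other c hc hcra⟩
  intro m
  induction m with
  | zero =>
    intro c r hit hr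
    rw [Function.iterate_zero_apply] at hit
    subst hit
    exact hbase c hr
  | succ m ih =>
    intro c r hit hr
    by_cases hc : isRootUF p c
    · have hcc : (pstepUF p)^[m + 1] c = c := iterate_root p c hc (m + 1)
      rw [hcc] at hit
      subst hit
      obtain ⟨m', hm', h1, h2⟩ := hbase c hc
      exact ⟨m', by omega, h1, h2⟩
    · have hcra : c ≠ ra := fun h => hc (by rw [h]; exact hra)
      rw [Function.iterate_succ_apply] at hit
      obtain ⟨m', hm', hit', hroot'⟩ := ih (pstepUF p c) r hit hr
      refine ⟨m' + 1, by omega, ?_, hroot'⟩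
      rw [Function.iterate_succ_apply, pstep_insert, if_neg hcra]
      exact hit'

theorem union_spec (maps : List String) (p : PySem.Dict (Int × Int) (Int × Int)) (k : Nat)
    (a b : Int × Int) (hufi : UFI maps p k) (hoka : okCell maps a) (hokb : okCell maps b)
    (hconn : Conn maps a b) :
    ∃ k', UFI maps (unionStep maps p a b) k' ∧
      (∀ c d r, Finds p c r → Finds p d r →
        ∃ r', Finds (unionStep maps p a b) c r' ∧ Finds (unionStep maps p a b) d r') ∧
      (∃ r, Finds (unionStep maps p a b) a r ∧ Finds (unionStep maps p a b) b r) := by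
  obtain ⟨ma, hita, hroota⟩ := UFI_find maps p k hufi a hoka
  obtain ⟨mb, hitb, hrootb⟩ := UFI_find maps p k hufi b hokb
  set ra := findUF p (ufFuel maps) a with hra_def
  set rb := findUF p (ufFuel maps) b with hrb_def
  have hconn_ara : Conn maps a ra := finds_conn maps p hufi.dom hufi.val ma a ra hoka hita
  have hconn_brb : Conn maps b rb := finds_conn maps p hufi.dom hufi.val mb b rb hokb hitb
  have hokra : okCell maps ra := conn_ok_right maps a ra hconn_ara
  have hokrb : okCell maps rb := conn_ok_right maps b rb hconn_brb
  by_cases heq : ra = rb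
  · have hu : unionStep maps p a b = p := by
      unfold unionStep
      rw [← hra_def, ← hrb_def, if_pos heq]
    rw [hu]
    exact ⟨k, hufi, fun c d r h1 h2 => ⟨r, h1, h2⟩,
      ⟨ra, ⟨ma, hita, hroota⟩, by rw [heq]; exact ⟨mb, hitb, hrootb⟩⟩⟩
  · have hu : unionStep maps p a b = p.insert ra rb := by
      unfold unionStep
      rw [← hra_def, ← hrb_def, if_neg heq]
    rw [hu]
    have htrans := transfer p ra rb hroota hrootb heq
    have hconn_rarb : Conn maps ra rb :=
      conn_trans maps ra b rb
        (conn_trans maps ra a b (conn_symm maps a ra hconn_ara) hconn) hconn_brb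
    refine ⟨k + 1, ⟨?_, ?_, ?_, ?_⟩, ?_, ?_⟩
    · intro c hok
      rw [PySem.Dict.get?_insert]
      split
      · rfl
      · exact hufi.dom c hok
    · intro c d hcd
      rw [PySem.Dict.get?_insert] at hcd
      split_ifs at hcd with hcra
      · subst hcra
        injection hcd with hd
        subst hd
        exact hconn_rarb
      · exact hufi.val c d hcd
    · intro c hok
      obtain ⟨r, m, hm, hit, hr⟩ := hufi.reach c hok
      obtain ⟨m', hm', hit', hr'⟩ := htrans m c r hit hr
      exact ⟨_, m', by omega, hit', hr'⟩
    · have hre : rootsFin maps (p.insert ra rb) = (rootsFin maps p).erase ra := by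
        apply Finset.ext
        intro c
        rw [Finset.mem_erase, mem_rootsFin, mem_rootsFin]
        constructor
        · rintro ⟨hg, hok, hr⟩
          have hcne : c ≠ ra := by
            rintro rfl
            unfold isRootUF at hr
            rw [pstep_insert, if_pos rfl] at hr
            exact heq hr.symm
          refine ⟨hcne, hg, hok, ?_⟩
          unfold isRootUF at hr ⊢
          rw [pstep_insert, if_neg hcne] at hr
          exact hr
        · rintro ⟨hcne, hg, hok, hr⟩
          refine ⟨hg, hok, ?_⟩
          unfold isRootUF at hr ⊢
          rw [pstep_insert, if_neg hcne]
          exact hr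
      have hmem : ra ∈ rootsFin maps p := by
        rw [mem_rootsFin]
        exact ⟨ok_mem_gridFin maps ra hokra, hokra, hroota⟩
      rw [hre, Finset.card_erase_of_mem hmem]
      have hb1 := hufi.bound
      have hpos : 0 < (rootsFin maps p).card := Finset.card_pos.2 ⟨ra, hmem⟩
      omega
    · intro c d r h1 h2
      obtain ⟨m1, hit1, hr1⟩ := h1
      obtain ⟨m2, hit2, hr2⟩ := h2
      obtain ⟨m1', _, hit1', hr1'⟩ := htrans m1 c r hit1 hr1
      obtain ⟨m2', _, hit2', hr2'⟩ := htrans m2 d r hit2 hr2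
      exact ⟨_, ⟨m1', hit1', hr1'⟩, ⟨m2', hit2', hr2'⟩⟩
    · obtain ⟨m1', _, hit1', hr1'⟩ := htrans ma a ra hita hroota
      obtain ⟨m2', _, hit2', hr2'⟩ := htrans mb b rb hitb hrootb
      rw [if_pos rfl] at hit1' hr1'
      rw [if_neg (fun h => heq h.symm)] at hit2' hr2'
      exact ⟨rb, ⟨m1', hit1', hr1'⟩, ⟨m2', hit2', hr2'⟩⟩

-- initialization pass
theorem init_untouched (maps : List String) :
    ∀ (l : List (Int × Int)) (p : PySem.Dict (Int × Int) (Int × Int)) (d : Int × Int),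
      d ∉ l → (l.foldl (initStep maps) p).get? d = p.get? d := by
  intro l
  induction l with
  | nil => intro p d _; rfl
  | cons c l ih =>
    intro p d hd
    rw [List.foldl_cons, ih _ d (fun h => hd (by simp [h]))]
    rw [initStep]
    split
    · rfl
    · rw [PySem.Dict.get?_insert, if_neg (fun h => hd (by simp [h]))]

theorem init_some (maps : List String) :
    ∀ (l : List (Int × Int)) (p : PySem.Dict (Int × Int) (Int × Int)) (d : Int × Int),
      (∀ c ∈ l, c ∈ gridFin maps) → okCell maps d → d ∈ l →
      (l.foldl (initStep maps) p).get? d = some d := by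
  intro l
  induction l with
  | nil => intro p d _ _ h; simp at h
  | cons c l ih =>
    intro p d hl hok hd
    rw [List.foldl_cons]
    by_cases hdl : d ∈ l
    · exact ih _ d (fun e he => hl e (by simp [he])) hok hdl
    · have hdc : d = c := by
        rcases List.mem_cons.1 hd with h | h
        · exact h
        · exact absurd h hdl
      subst hdc
      rw [init_untouched maps l _ d hdl]
      rw [initStep, if_neg (by simpa using hok.2.2.2.2)]
      rw [PySem.Dict.get?_insert, if_pos rfl]

theorem init_notok (maps : List String) :
    ∀ (l : List (Int × Int)) (p : PySem.Dict (Int × Int) (Int × Int)) (d : Int × Int),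
      (∀ c ∈ l, c ∈ gridFin maps) → ¬ okCell maps d →
      (l.foldl (initStep maps) p).get? d = p.get? d := by
  intro l
  induction l with
  | nil => intro p d _ _; rfl
  | cons c l ih =>
    intro p d hl hnok
    rw [List.foldl_cons, ih _ d (fun e he => hl e (by simp [he])) hnok]
    rw [initStep]
    split
    · rfl
    · rw [PySem.Dict.get?_insert]
      rename_i hcX
      rw [if_neg]
      rintro rfl
      have hcg := hl d (by simp)
      rw [mem_gridFin] at hcg
      exact hnok ⟨hcg.1, hcg.2.1, hcg.2.2.1, hcg.2.2.2, by simpa using hcX⟩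

-- the three passes of solution_alt, as standalone functions of maps
def p0D (maps : List String) : PySem.Dict (Int × Int) (Int × Int) :=
  (allCells maps).foldl (initStep maps) PySem.Dict.empty
def pfD (maps : List String) : PySem.Dict (Int × Int) (Int × Int) :=
  (allCells maps).foldl (edgeStep maps) (p0D maps)
def sumsD (maps : List String) : PySem.Dict (Int × Int) Int :=
  (allCells maps).foldl (sumStep maps (pfD maps)) PySem.Dict.empty

theorem solution_alt_eq (maps : List String) :
    solution_alt maps = (if (sumsD maps).items.isEmpty then [-1]
      else PySem.List.sorted (sumsD maps).values (fun x => x) false) := by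
  rw [solution_alt]
  rw [nested_foldl maps (initStep maps), ← p0D]
  rw [nested_foldl maps (edgeStep maps), ← pfD]
  rw [nested_foldl maps (sumStep maps (pfD maps)), ← sumsD]

theorem p0_some (maps : List String) (d : Int × Int) (hok : okCell maps d) :
    (p0D maps).get? d = some d :=
  init_some maps (allCells maps) PySem.Dict.empty d
    (fun c hc => (mem_allCells maps c).1 hc) hok
    ((mem_allCells maps d).2 (ok_mem_gridFin maps d hok))

theorem p0_notok (maps : List String) (d : Int × Int) (hnok : ¬ okCell maps d) :
    (p0D maps).get? d = none := by
  rw [p0D, init_notok maps (allCells maps) PySem.Dict.empty d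
    (fun c hc => (mem_allCells maps c).1 hc) hnok]
  rfl

theorem UFI_p0 (maps : List String) : UFI maps (p0D maps) 0 := by
  have hroot : ∀ c, okCell maps c → isRootUF (p0D maps) c := by
    intro c hok
    show pstepUF (p0D maps) c = c
    rw [pstepUF, PySem.Dict.getD_eq_get?_getD, p0_some maps c hok]
    rfl
  refine ⟨?_, ?_, ?_, ?_⟩
  · intro c hok
    rw [p0_some maps c hok]
    rfl
  · intro c d hcd
    by_cases hok : okCell maps c
    · rw [p0_some maps c hok] at hcd
      injection hcd with hd
      subst hd
      exact conn_refl maps c hok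
    · rw [p0_notok maps c hok] at hcd
      exact absurd hcd (by simp)
  · intro c hok
    exact ⟨c, 0, Nat.le_refl 0, rfl, hroot c hok⟩
  · have hsub : rootsFin maps (p0D maps) ⊆ pfilter (fun c => okCell maps c) (gridFin maps) := by
      intro c hc
      rw [mem_rootsFin] at hc
      rw [mem_pfilter]
      exact ⟨hc.1, hc.2.1⟩
    have := Finset.card_le_card hsub
    unfold nOk
    omega

def EdgeDone (maps : List String) (p : PySem.Dict (Int × Int) (Int × Int))
    (pre : List (Int × Int)) : Prop :=
  ∀ c ∈ pre, okCell maps c → ∀ n : Int × Int, (n = (c.1 + 1, c.2) ∨ n = (c.1, c.2 + 1)) →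
    okCell maps n → ∃ r, Finds p c r ∧ Finds p n r

theorem edge_fold (maps : List String) :
    ∀ (l pre : List (Int × Int)) (p : PySem.Dict (Int × Int) (Int × Int)) (k : Nat),
      (∀ c ∈ l, c ∈ gridFin maps) → UFI maps p k → EdgeDone maps p pre →
      ∃ k', UFI maps (l.foldl (edgeStep maps) p) k' ∧
        EdgeDone maps (l.foldl (edgeStep maps) p) (pre ++ l) := by
  intro l
  induction l with
  | nil => intro pre p k _ hufi hed; exact ⟨k, hufi, by simpa using hed⟩
  | cons c l ih =>
    intro pre p k hgl hufi hed
    have hcg : c ∈ gridFin maps := hgl c (by simp)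
    by_cases hX : (cellChar maps c.1 c.2 == 'X') = true
    · have hE : edgeStep maps p c = p := by
        unfold edgeStep
        rw [if_pos hX]
      have hed' : EdgeDone maps p (pre ++ [c]) := by
        intro d hd hokd n hn hokn
        rcases List.mem_append.1 hd with hd | hd
        · exact hed d hd hokd n hn hokn
        · simp at hd
          subst hd
          exact absurd (by simpa using hX) hokd.2.2.2.2
      rw [List.foldl_cons]
      have hres := ih (pre ++ [c]) (edgeStep maps p c) k (fun d hd => hgl d (by simp [hd]))
        (by rw [hE]; exact hufi) (by rw [hE]; exact hed')
      rw [show (pre ++ [c]) ++ l = pre ++ c :: l from by simp] at hres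
      exact hres
    · have hokc : okCell maps c := by
        rw [mem_gridFin] at hcg
        exact ⟨hcg.1, hcg.2.1, hcg.2.2.1, hcg.2.2.2, by simpa using hX⟩
      set g : PySem.Dict (Int × Int) (Int × Int) → (Int × Int) → PySem.Dict (Int × Int) (Int × Int) :=
        fun q n =>
          if decide (n.1 < (gH maps : Int)) && decide (n.2 < (gW maps : Int))
              && !(cellChar maps n.1 n.2 == 'X') then unionStep maps q c n else q with hg_def
      have hE : edgeStep maps p c = g (g p (c.1 + 1, c.2)) (c.1, c.2 + 1) := by
        unfold edgeStep
        rw [if_neg hX]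
        rfl
      have hstep : ∀ (q : PySem.Dict (Int × Int) (Int × Int)) (kq : Nat) (n : Int × Int),
          UFI maps q kq → (n = (c.1 + 1, c.2) ∨ n = (c.1, c.2 + 1)) →
          ∃ k', UFI maps (g q n) k' ∧
            (∀ x y r, Finds q x r → Finds q y r → ∃ r', Finds (g q n) x r' ∧ Finds (g q n) y r') ∧
            (okCell maps n → ∃ r, Finds (g q n) c r ∧ Finds (g q n) n r) := by
        intro q kq n hufiq hn
        have hadj : adjC c n := by
          rcases hn with rfl | rfl
          · exact Or.inl rfl
          · exact Or.inr (Or.inr (Or.inl rfl))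
        by_cases hguard : (decide (n.1 < (gH maps : Int)) && decide (n.2 < (gW maps : Int))
            && !(cellChar maps n.1 n.2 == 'X')) = true
        · have hokn : okCell maps n := by
            simp only [Bool.and_eq_true, decide_eq_true_eq, Bool.not_eq_true'] at hguard
            rw [mem_gridFin] at hcg
            rcases hn with rfl | rfl
            · exact ⟨by simp; omega, hguard.1.1, by simp; omega, hguard.1.2, by simpa using hguard.2⟩
            · exact ⟨by simp; omega, hguard.1.1, by simp; omega, hguard.1.2, by simpa using hguard.2⟩
          have hconncn : Conn maps c n := conn_adj maps c n hokc hokn hadj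
          have hgq : g q n = unionStep maps q c n := by
            simp only [hg_def]
            rw [if_pos hguard]
          obtain ⟨k', h1, h2, h3⟩ := union_spec maps q kq c n hufiq hokc hokn hconncn
          rw [hgq]
          exact ⟨k', h1, fun x y r hx hy => h2 x y r hx hy, fun _ => h3⟩
        · have hgq : g q n = q := by
            simp only [hg_def]
            rw [if_neg hguard]
          rw [hgq]
          refine ⟨kq, hufiq, fun x y r hx hy => ⟨r, hx, hy⟩, ?_⟩
          intro hokn
          exfalso
          apply hguard
          simp only [Bool.and_eq_true, decide_eq_true_eq, Bool.not_eq_true']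
          exact ⟨⟨hokn.2.1, hokn.2.2.2.1⟩, by simpa using hokn.2.2.2.2⟩
      obtain ⟨k1, h11, h12, h13⟩ := hstep p k (c.1 + 1, c.2) hufi (Or.inl rfl)
      obtain ⟨k2, h21, h22, h23⟩ := hstep (g p (c.1 + 1, c.2)) k1 (c.1, c.2 + 1) h11 (Or.inr rfl)
      have hed' : EdgeDone maps (g (g p (c.1 + 1, c.2)) (c.1, c.2 + 1)) (pre ++ [c]) := by
        intro d hd hokd n hn hokn
        rcases List.mem_append.1 hd with hd | hd
        · obtain ⟨r, hr1, hr2⟩ := hed d hd hokd n hn hokn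
          obtain ⟨r', h1', h2'⟩ := h12 d n r hr1 hr2
          exact h22 d n r' h1' h2'
        · simp at hd
          subst hd
          rcases hn with rfl | rfl
          · obtain ⟨r, hr1, hr2⟩ := h13 hokn
            exact h22 d _ r hr1 hr2
          · exact h23 hokn
      rw [List.foldl_cons]
      have hres := ih (pre ++ [c]) (edgeStep maps p c) k2 (fun d hd => hgl d (by simp [hd]))
        (by rw [hE]; exact h21) (by rw [hE]; exact hed')
      rw [show (pre ++ [c]) ++ l = pre ++ c :: l from by simp] at hres
      exact hres

theorem pf_props (maps : List String) :
    ∃ k, UFI maps (pfD maps) k ∧ EdgeDone maps (pfD maps) (allCells maps) := by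
  obtain ⟨k', h1, h2⟩ := edge_fold maps (allCells maps) [] (p0D maps) 0
    (fun c hc => (mem_allCells maps c).1 hc) (UFI_p0 maps) (by intro c hc; simp at hc)
  exact ⟨k', h1, by simpa using h2⟩

def RF (maps : List String) (c : Int × Int) : Int × Int := findUF (pfD maps) (ufFuel maps) c

theorem RF_finds (maps : List String) (c : Int × Int) (hok : okCell maps c) :
    Finds (pfD maps) c (RF maps c) := by
  obtain ⟨k, hufi, _⟩ := pf_props maps
  exact UFI_find maps (pfD maps) k hufi c hok

theorem RF_conn (maps : List String) (c : Int × Int) (hok : okCell maps c) :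
    Conn maps c (RF maps c) := by
  obtain ⟨k, hufi, _⟩ := pf_props maps
  obtain ⟨m, hit, _⟩ := RF_finds maps c hok
  exact finds_conn maps (pfD maps) hufi.dom hufi.val m c (RF maps c) hok hit

theorem RF_eq_of_conn (maps : List String) (a b : Int × Int) (h : Conn maps a b) :
    RF maps a = RF maps b := by
  obtain ⟨k, hufi, hedge⟩ := pf_props maps
  have hoka : okCell maps a := h.1
  have key : ∀ b', ReachP maps (fun _ => false) a b' →
      ∃ r, Finds (pfD maps) a r ∧ Finds (pfD maps) b' r := by
    intro b' hr
    induction hr with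
    | base => exact ⟨RF maps a, RF_finds maps a hoka, RF_finds maps a hoka⟩
    | @step d n hrd hadj hokn hf ih =>
      have hokd : okCell maps d := conn_ok_right maps a d ⟨hoka, hrd⟩
      obtain ⟨r1, har1, hdr1⟩ := ih
      have hpair : ∃ r, Finds (pfD maps) d r ∧ Finds (pfD maps) n r := by
        rcases hadj with hcase | hcase | hcase | hcase
        · exact hedge d ((mem_allCells maps d).2 (ok_mem_gridFin maps d hokd)) hokd n
            (Or.inl hcase) hokn
        · have hd : d = (n.1 + 1, n.2) := by
            rw [hcase]
            exact Prod.ext (show d.1 = d.1 - 1 + 1 by omega) rfl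
          obtain ⟨r, hnr, hdr⟩ := hedge n ((mem_allCells maps n).2 (ok_mem_gridFin maps n hokn))
            hokn d (Or.inl hd) hokd
          exact ⟨r, hdr, hnr⟩
        · exact hedge d ((mem_allCells maps d).2 (ok_mem_gridFin maps d hokd)) hokd n
            (Or.inr hcase) hokn
        · have hd : d = (n.1, n.2 + 1) := by
            rw [hcase]
            exact Prod.ext rfl (show d.2 = d.2 - 1 + 1 by omega)
          obtain ⟨r, hnr, hdr⟩ := hedge n ((mem_allCells maps n).2 (ok_mem_gridFin maps n hokn))
            hokn d (Or.inr hd) hokd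
          exact ⟨r, hdr, hnr⟩
      obtain ⟨r2, hdr2, hnr2⟩ := hpair
      have hr12 : r1 = r2 := finds_unique (pfD maps) d r1 r2 hdr1 hdr2
      exact ⟨r1, har1, hr12 ▸ hnr2⟩
  obtain ⟨r, har, hbr⟩ := key b h.2
  have h1 : RF maps a = r := finds_unique (pfD maps) a (RF maps a) r (RF_finds maps a hoka) har
  have h2 : RF maps b = r :=
    finds_unique (pfD maps) b (RF maps b) r (RF_finds maps b (conn_ok_right maps a b h)) hbr
  rw [h1, h2]

theorem RF_conn_of_eq (maps : List String) (a b : Int × Int) (hoka : okCell maps a)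
    (hokb : okCell maps b) (h : RF maps a = RF maps b) : Conn maps a b := by
  have h1 := RF_conn maps a hoka
  have h2 := RF_conn maps b hokb
  rw [h] at h1
  exact conn_trans maps a (RF maps b) b h1 (conn_symm maps b (RF maps b) h2)

-- the grouping pass
def InvS (maps : List String) (pre : List (Int × Int)) (d : PySem.Dict (Int × Int) Int) : Prop :=
  d.items = (seeds maps pre).map
    (fun s => (RF maps s, sumVal maps (clsFin maps s ∩ pre.toFinset)))

theorem toFinset_snoc (pre : List (Int × Int)) (c : Int × Int) :
    (pre ++ [c]).toFinset = insert c pre.toFinset := by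
  ext d; simp

theorem inter_insert_notmem (S P : Finset (Int × Int)) (c : Int × Int) (h : c ∉ S) :
    S ∩ insert c P = S ∩ P := by
  ext d
  simp only [Finset.mem_inter, Finset.mem_insert]
  constructor
  · rintro ⟨hd, rfl | hd2⟩
    · exact absurd hd h
    · exact ⟨hd, hd2⟩
  · rintro ⟨hd, hd2⟩
    exact ⟨hd, Or.inr hd2⟩

theorem sum_inter_insert_mem (maps : List String) (S P : Finset (Int × Int)) (c : Int × Int)
    (hS : c ∈ S) (hP : c ∉ P) :
    sumVal maps (S ∩ insert c P) = sumVal maps (S ∩ P) + cellVal maps c.1 c.2 := by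
  have h1 : S ∩ insert c P = insert c (S ∩ P) := by
    ext d
    simp only [Finset.mem_inter, Finset.mem_insert]
    constructor
    · rintro ⟨hd, rfl | hd2⟩
      · exact Or.inl rfl
      · exact Or.inr ⟨hd, hd2⟩
    · rintro (rfl | ⟨hd, hd2⟩)
      · exact ⟨hS, Or.inl rfl⟩
      · exact ⟨hd, Or.inr hd2⟩
  rw [h1, sumVal, Finset.sum_insert (by simp [hP]), sumVal]
  ring

set_option maxHeartbeats 1600000 in
theorem stepS_inv (maps : List String) (pre : List (Int × Int)) (d : PySem.Dict (Int × Int) Int)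
    (c : Int × Int) (hc : c ∈ gridFin maps) (hcpre : c ∉ pre) (hinv : InvS maps pre d) :
    InvS maps (pre ++ [c]) (sumStep maps (pfD maps) d c) := by
  have hso := seedsOK maps pre
  rw [InvS] at hinv
  have hkeys : d.keys = (seeds maps pre).map (RF maps) := by
    simp only [PySem.Dict.keys, hinv, List.map_map]
    rfl
  have hnodk : d.keys.Nodup := by
    rw [hkeys]
    have hp : (seeds maps pre).Pairwise (fun a b => RF maps a ≠ RF maps b) := by
      refine List.Pairwise.imp_of_mem ?_ hso.pw
      intro a b ha hb hnc heq
      exact hnc (RF_conn_of_eq maps a b (hso.ok a ha) (hso.ok b hb) heq)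
    exact (List.pairwise_map).2 hp
  rw [InvS, seeds_snoc, toFinset_snoc]
  by_cases hX : (cellChar maps c.1 c.2 == 'X') = true
  · have hnok : ¬ okCell maps c := fun h => h.2.2.2.2 (by simpa using hX)
    have hseed : isSeed maps (seeds maps pre) c = false :=
      Bool.eq_false_iff.2 (fun h => hnok ((isSeed_iff _ _ _).1 h).1)
    rw [hseed]
    simp only [Bool.false_eq_true, if_false]
    have hstep : sumStep maps (pfD maps) d c = d := by
      unfold sumStep
      rw [if_pos hX]
    rw [hstep, hinv]
    apply List.map_congr_left
    intro s hs
    have hcn : c ∉ clsFin maps s :=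
      fun hmem => hnok (conn_ok_right maps s c ((mem_clsFin maps s c).1 hmem))
    rw [inter_insert_notmem _ _ _ hcn]
  · have hokc : okCell maps c := by
      rw [mem_gridFin] at hc
      exact ⟨hc.1, hc.2.1, hc.2.2.1, hc.2.2.2, by simpa using hX⟩
    have hstep : sumStep maps (pfD maps) d c
        = d.insert (RF maps c) (d.getD (RF maps c) 0 + cellVal maps c.1 c.2) := by
      simp only [sumStep, RF]
      rw [if_neg hX]
    rw [hstep]
    by_cases hseed : isSeed maps (seeds maps pre) c = true
    · rw [hseed]
      simp only [if_true]
      obtain ⟨_, hnc⟩ := (isSeed_iff _ _ _).1 hseed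
      have hnotin : d.contains (RF maps c) = false := by
        rw [PySem.Dict.contains_eq_decide_mem_keys, hkeys]
        rw [decide_eq_false_iff_not]
        rw [List.mem_map]
        rintro ⟨s, hs, heq⟩
        exact hnc s hs (RF_conn_of_eq maps s c (hso.ok s hs) hokc heq)
      have hgetD : d.getD (RF maps c) 0 = 0 := PySem.Dict.getD_of_not_contains d 0 hnotin
      rw [PySem.Dict.items_insert_of_not_contains d _ hnotin, hinv, hgetD, List.map_append]
      congr 1
      · apply List.map_congr_left
        intro s hs
        have hcn : c ∉ clsFin maps s := fun hmem => hnc s hs ((mem_clsFin maps s c).1 hmem)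
        rw [inter_insert_notmem _ _ _ hcn]
      · simp only [List.map_singleton]
        have hclsP : clsFin maps c ∩ pre.toFinset = ∅ := by
          rw [Finset.eq_empty_iff_forall_notMem]
          intro e he
          rw [Finset.mem_inter, mem_clsFin, List.mem_toFinset] at he
          obtain ⟨hconn, hepre⟩ := he
          have hoke : okCell maps e := conn_ok_right maps c e hconn
          obtain ⟨s, hs, hconns⟩ := hso.cover e hepre hoke
          exact hnc s hs (conn_trans maps s e c hconns (conn_symm maps c e hconn))
        have hone : clsFin maps c ∩ insert c pre.toFinset = {c} := by
          ext e
          rw [Finset.mem_inter, Finset.mem_insert, Finset.mem_singleton, mem_clsFin]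
          constructor
          · rintro ⟨hconn, rfl | hmem⟩
            · rfl
            · exfalso
              have hbad : e ∈ clsFin maps c ∩ pre.toFinset := by
                rw [Finset.mem_inter, mem_clsFin]
                exact ⟨hconn, hmem⟩
              rw [hclsP] at hbad
              exact absurd hbad (by simp)
          · rintro rfl
            exact ⟨conn_refl maps e hokc, Or.inl rfl⟩
        have hsum : sumVal maps ({c} : Finset (Int × Int)) = cellVal maps c.1 c.2 := by
          rw [sumVal, Finset.sum_singleton]
        rw [hone, hsum, zero_add]
    · have hseedf : isSeed maps (seeds maps pre) c = false := by
        revert hseed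
        cases isSeed maps (seeds maps pre) c <;> simp
      rw [hseedf]
      simp only [Bool.false_eq_true, if_false]
      have hex : ∃ s ∈ seeds maps pre, Conn maps s c := by
        by_contra hno
        push_neg at hno
        exact hseed ((isSeed_iff _ _ _).2 ⟨hokc, fun s hs hcon => hno s hs hcon⟩)
      obtain ⟨s0, hs0, hconn0⟩ := hex
      have hRreq : RF maps c = RF maps s0 := (RF_eq_of_conn maps s0 c hconn0).symm
      have hcont : d.contains (RF maps c) = true := by
        rw [PySem.Dict.contains_eq_decide_mem_keys, hkeys, decide_eq_true_eq, List.mem_map]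
        exact ⟨s0, hs0, hRreq.symm⟩
      have hmemitem : (RF maps s0, sumVal maps (clsFin maps s0 ∩ pre.toFinset)) ∈ d.items := by
        rw [hinv, List.mem_map]
        exact ⟨s0, hs0, rfl⟩
      have hgetD : d.getD (RF maps c) 0 = sumVal maps (clsFin maps s0 ∩ pre.toFinset) := by
        rw [hRreq]
        exact PySem.Dict.getD_of_mem_items d hmemitem hnodk 0
      rw [PySem.Dict.items_insert_of_contains d _ hcont, hinv, List.map_map]
      apply List.map_congr_left
      intro s hs
      simp only [Function.comp_apply]
      by_cases hss0 : s = s0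
      · subst hss0
        rw [if_pos (by simp [hRreq])]
        have hcmem : c ∈ clsFin maps s := (mem_clsFin maps s c).2 hconn0
        have hcP : c ∉ pre.toFinset := by
          rw [List.mem_toFinset]
          exact hcpre
        rw [hgetD, sum_inter_insert_mem maps _ _ c hcmem hcP, hRreq]
      · have hneq : RF maps s ≠ RF maps c := by
          intro heq
          apply hss0
          have hconnsc : Conn maps s c :=
            RF_conn_of_eq maps s c (hso.ok s hs) hokc heq
          exact seeds_unique maps (seeds maps pre) hso.pw s s0 c hs hs0 hconnsc hconn0
        rw [if_neg (by simp [hneq])]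
        have hcn : c ∉ clsFin maps s := by
          intro hmem
          have hconnsc := (mem_clsFin maps s c).1 hmem
          exact hss0 (seeds_unique maps (seeds maps pre) hso.pw s s0 c hs hs0 hconnsc hconn0)
        rw [inter_insert_notmem _ _ _ hcn]

theorem sum_fold (maps : List String) :
    ∀ (l pre : List (Int × Int)) (d : PySem.Dict (Int × Int) Int),
      (pre ++ l).Nodup → (∀ c ∈ pre ++ l, c ∈ gridFin maps) → InvS maps pre d →
      InvS maps (pre ++ l) (l.foldl (sumStep maps (pfD maps)) d) := by
  intro l
  induction l with
  | nil => intro pre d _ _ h; simpa using h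
  | cons c l ih =>
    intro pre d hnd hg hinv
    have hcpre : c ∉ pre := by
      intro h
      exact List.disjoint_of_nodup_append hnd h (by simp)
    have hcg : c ∈ gridFin maps := hg c (by simp)
    have hassoc : pre ++ c :: l = (pre ++ [c]) ++ l := by simp
    rw [hassoc]
    rw [List.foldl_cons]
    apply ih (pre ++ [c]) _ (by rw [← hassoc]; exact hnd) (by rw [← hassoc]; exact hg)
    exact stepS_inv maps pre d c hcg hcpre hinv

theorem allCells_toFinset (maps : List String) :
    (allCells maps).toFinset = gridFin maps := by
  ext c
  rw [List.mem_toFinset, mem_allCells]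

theorem sums_items (maps : List String) :
    (sumsD maps).items = (seeds maps (allCells maps)).map
      (fun s => (RF maps s, sumCls maps s)) := by
  have h0 : InvS maps [] PySem.Dict.empty := by
    show PySem.Dict.empty.items = _
    simp [seeds, seedsAux, PySem.Dict.empty]
  have h := sum_fold maps (allCells maps) [] PySem.Dict.empty
    (by simpa using nodup_allCells maps)
    (by intro c hc; rw [← mem_allCells]; simpa using hc) h0
  simp only [List.nil_append] at h
  rw [InvS] at h
  rw [sumsD] at *
  rw [h]
  apply List.map_congr_left
  intro s hs
  have hok := (seedsOK maps (allCells maps)).ok s hs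
  congr 1
  rw [allCells_toFinset, sumCls]
  congr 1
  exact Finset.inter_eq_left.2 (fun c hcm => ((mem_pfilter _ _ c).1 hcm).1)

theorem solution_eq_alt (maps : List String) : solution maps = solution_alt maps := by
  rw [solutionA_canon, solution_alt_eq]
  have hvals : (sumsD maps).values = ansCanon maps := by
    simp only [PySem.Dict.values, sums_items, List.map_map]
    rfl
  have hempty : (sumsD maps).items.isEmpty = true ↔ ansCanon maps = [] := by
    rw [List.isEmpty_iff, sums_items]
    unfold ansCanon
    rw [List.map_eq_nil_iff, List.map_eq_nil_iff]
  by_cases h : ansCanon maps = []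
  · rw [if_pos h, if_pos (hempty.2 h)]
  · rw [if_neg h, if_neg (fun hh => h (hempty.1 hh)), hvals]

-- ===== VERDICT (by name: the statement is the Claim_ definition above) =====
theorem solution_spec : Claim_equal_solution := by
  intro maps _ _
  show solution maps = solution_alt maps
  exact solution_eq_alt maps
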